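-- pv_equiv track=rewrite | github.com/Szzng/Today-I-Learned | Algorithm/탐색/(P159993)BFS_미로탈출.py | solution
-- ===== SOURCE A (Python) =====
-- from collections import deque
--
-- def solution(maps):
--     n, m = len(maps), len(maps[0])
--     visited = [[[False] * 2 for _ in range(m)] for _ in range(n)]
--     q = deque()
--     endy = endx = -1
--
--     # 시작점과 출구 좌표 초기화
--     for i in range(n):
--         for j in range(m):
--             if maps[i][j] == 'S':
--                 q.append((i, j, 0, 0))  # (y좌표, x좌표, 레버 사용 여부, 시간)
--                 visited[i][j][0] = True
--             elif maps[i][j] == 'E':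
--                 endy, endx = i, j
--
--     while q:
--         y, x, lever_used, time = q.popleft()
--
--         if (y, x) == (endy, endx) and lever_used:
--             return time
--
--         # 방향을 나타내는 전역 변수
--         DIRECTIONS = [(-1, 0), (1, 0), (0, -1), (0, 1)]
--         for dy, dx in DIRECTIONS:
--             ny, nx = y + dy, x + dx
--             if 0 <= ny < n and 0 <= nx < m and not visited[ny][nx][lever_used] and maps[ny][nx] != 'X':
--                 new_lever_used = 1 if maps[ny][nx] == 'L' else lever_used
--                 q.append((ny, nx, new_lever_used, time + 1))
--                 visited[ny][nx][new_lever_used] = True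
--
--     return -1
-- ===== SOURCE B (Python) =====
-- def solution(maps):
--     # Bellman-Ford-style synchronous relaxation over (row, col, lever) states,
--     # instead of A's queue BFS: repeatedly relax all known states until stable.
--     n, m = len(maps), len(maps[0])
--     end = None
--     dp = {}
--     for i in range(n):
--         for j in range(m):
--             if maps[i][j] == 'S':
--                 dp[(i, j, 0)] = 0
--             elif maps[i][j] == 'E':
--                 end = (i, j)
--     for _ in range(2 * n * m):
--         new = dict(dp)
--         changed = False
--         for (y, x, lever), d in dp.items():
--             for ny, nx in ((y - 1, x), (y + 1, x), (y, x - 1), (y, x + 1)):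
--                 if 0 <= ny < n and 0 <= nx < m and maps[ny][nx] != 'X':
--                     nl = 1 if maps[ny][nx] == 'L' else lever
--                     key = (ny, nx, nl)
--                     if key not in new or new[key] > d + 1:
--                         new[key] = d + 1
--                         changed = True
--         dp = new
--         if not changed:
--             break
--     if end is None:
--         return -1
--     return dp.get((end[0], end[1], 1), -1)
-- ===== Notes on version B (the rewrite author's own statement) =====
-- stated objective: alternative
-- what changed: Replaces A's single layered BFS (FIFO queue of (y,x,lever,time) tuples with a 3-D visited array, which re-enqueues a duplicate entry for every lever cell seen from the lever-less layer) by Bellman-Ford-style dynamic programming: a dict from (y,x,lever) states to distances is relaxed in whole-grid synchronous passes until it stabilises, and the answer is read off at the exit state with lever=1.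
import Mathlib
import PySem

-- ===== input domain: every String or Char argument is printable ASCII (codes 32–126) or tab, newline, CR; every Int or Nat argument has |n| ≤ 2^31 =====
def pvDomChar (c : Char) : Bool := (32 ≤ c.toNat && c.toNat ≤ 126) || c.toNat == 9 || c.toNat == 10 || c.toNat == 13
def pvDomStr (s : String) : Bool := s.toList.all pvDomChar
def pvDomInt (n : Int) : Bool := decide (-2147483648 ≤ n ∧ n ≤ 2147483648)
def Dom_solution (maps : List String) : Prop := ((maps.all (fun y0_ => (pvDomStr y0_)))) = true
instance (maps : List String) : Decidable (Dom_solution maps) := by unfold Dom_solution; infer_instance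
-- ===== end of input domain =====

-- B replaces A's layered queue BFS by Bellman-Ford-style relaxation of a state→distance
-- dict until stable (a different algorithm of similar size; not claimed faster).

-- ===== PORT A =====
-- maps[y][x] for 0 ≤ y, x (all uses are bounds-guarded or inside Pre_, where it is exact)
def pvAt (g : List (List Char)) (y x : Int) : Char :=
  ((g.getD y.toNat []).getD x.toNat ' ')

def pvDirs : List (Int × Int) := [(-1, 0), (1, 0), (0, -1), (0, 1)]

-- visited[y][x][l] (reads/writes only at 0 ≤ y < n, 0 ≤ x < m, l ∈ {0,1}, where it is exact)
def pvVGet (v : List (List (List Bool))) (y x l : Int) : Bool :=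
  (((v.getD y.toNat []).getD x.toNat []).getD l.toNat false)

def pvVSet (v : List (List (List Bool))) (y x l : Int) : List (List (List Bool)) :=
  v.set y.toNat ((v.getD y.toNat []).set x.toNat
    (((v.getD y.toNat []).getD x.toNat []).set l.toNat true))

-- A's initialisation scan: builds q, marks visited at the 'S' cells, records the last 'E'
def pvScanA (g : List (List Char)) (n m : Int)
    (v : List (List (List Bool))) :
    List (Int × Int × Int × Int) × List (List (List Bool)) × Int × Int :=
  (PySem.List.pyRange 0 n 1).foldl (fun s i =>
    (PySem.List.pyRange 0 m 1).foldl (fun s j =>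
      if pvAt g i j = 'S' then
        (s.1 ++ [(i, j, 0, 0)], pvVSet s.2.1 i j 0, s.2.2.1, s.2.2.2)
      else if pvAt g i j = 'E' then
        (s.1, s.2.1, i, j)
      else s) s) ([], v, -1, -1)

-- A's while-loop (fuel 13·n·m+13 strictly exceeds the potential proved to drop each iteration,
-- so the 0-fuel branch is never reached; see the pvPhi lemmas below)
-- the body of A's inner 'for dy, dx in DIRECTIONS' loop
def pvExpand (g : List (List Char)) (n m y x lv t : Int)
    (s : List (Int × Int × Int × Int) × List (List (List Bool))) (d : Int × Int) :
    List (Int × Int × Int × Int) × List (List (List Bool)) :=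
  let ny := y + d.1
  let nx := x + d.2
  if 0 ≤ ny ∧ ny < n ∧ 0 ≤ nx ∧ nx < m ∧ pvVGet s.2 ny nx lv = false ∧
      pvAt g ny nx ≠ 'X' then
    let nl : Int := if pvAt g ny nx = 'L' then 1 else lv
    (s.1 ++ [(ny, nx, nl, t + 1)], pvVSet s.2 ny nx nl)
  else s

def pvLoopA (g : List (List Char)) (n m endy endx : Int) :
    Nat → List (Int × Int × Int × Int) → List (List (List Bool)) → Int
  | 0, _, _ => -1
  | _ + 1, [], _ => -1
  | fuel + 1, (y, x, lv, t) :: rest, v =>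
    if (y, x) = (endy, endx) ∧ lv ≠ 0 then t
    else
      let s := pvDirs.foldl (pvExpand g n m y x lv t) (rest, v)
      pvLoopA g n m endy endx fuel s.1 s.2

def solution (maps : List String) : Int :=
  let g := maps.map String.toList
  let n : Int := maps.length
  let m : Int := (maps.headD "").length
  let v0 : List (List (List Bool)) :=
    List.replicate n.toNat (List.replicate m.toNat [false, false])
  let s := pvScanA g n m v0
  pvLoopA g n m s.2.2.1 s.2.2.2 (13 * (n.toNat * m.toNat) + 13) s.1 s.2.1

-- ===== PORT B =====
def pvNbrs (y x : Int) : List (Int × Int) := [(y - 1, x), (y + 1, x), (y, x - 1), (y, x + 1)]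

-- B's initialisation scan: seeds the dp dict at the 'S' cells, records the last 'E'
def pvScanB (g : List (List Char)) (n m : Int) :
    PySem.Dict (Int × Int × Int) Int × Option (Int × Int) :=
  (PySem.List.pyRange 0 n 1).foldl (fun s i =>
    (PySem.List.pyRange 0 m 1).foldl (fun s j =>
      if pvAt g i j = 'S' then (s.1.insert (i, j, 0) 0, s.2)
      else if pvAt g i j = 'E' then (s.1, some (i, j))
      else s) s) (PySem.Dict.empty, none)

-- one synchronous relaxation pass; the Bool records whether anything changed
-- B's per-neighbour relaxation (body of the inner 'for ny, nx in …' loop)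
def pvRelaxCell (g : List (List Char)) (n m : Int) (it : (Int × Int × Int) × Int)
    (s : PySem.Dict (Int × Int × Int) Int × Bool) (nb : Int × Int) :
    PySem.Dict (Int × Int × Int) Int × Bool :=
  let ny : Int := nb.1
  let nx : Int := nb.2
  if 0 ≤ ny ∧ ny < n ∧ 0 ≤ nx ∧ nx < m ∧ pvAt g ny nx ≠ 'X' then
    let nl : Int := if pvAt g ny nx = 'L' then 1 else it.1.2.2
    match s.1.get? (ny, nx, nl) with
    | none => (s.1.insert (ny, nx, nl) (it.2 + 1), true)
    | some old =>
      if old > it.2 + 1 then (s.1.insert (ny, nx, nl) (it.2 + 1), true) else s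
  else s

def pvRelax (g : List (List Char)) (n m : Int)
    (dp : PySem.Dict (Int × Int × Int) Int) :
    PySem.Dict (Int × Int × Int) Int × Bool :=
  dp.items.foldl (fun s it =>
    (pvNbrs it.1.1 it.1.2.1).foldl (pvRelaxCell g n m it) s) (dp, false)

-- 'for _ in range(2*n*m): … if not changed: break'
def pvRounds (g : List (List Char)) (n m : Int) :
    Nat → PySem.Dict (Int × Int × Int) Int → PySem.Dict (Int × Int × Int) Int
  | 0, dp => dp
  | k + 1, dp =>
    let s := pvRelax g n m dp
    if s.2 then pvRounds g n m k s.1 else s.1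

def solution_alt (maps : List String) : Int :=
  let g := maps.map String.toList
  let n : Int := maps.length
  let m : Int := (maps.headD "").length
  let s0 := pvScanB g n m
  let dp := pvRounds g n m (2 * (n.toNat * m.toNat)) s0.1
  match s0.2 with
  | none => -1
  | some e => dp.getD (e.1, e.2, 1) (-1)

-- ===== PRECONDITION & SPEC =====
-- Pre_ excludes exactly the inputs where the Python A raises IndexError: the empty list
-- (len(maps[0])) and ragged inputs with some row shorter than row 0 (maps[i][j], j < m).
def Pre_solution (maps : List String) : Prop :=
  maps ≠ [] ∧ ∀ s ∈ maps, (maps.headD "").length ≤ s.length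
instance (maps : List String) : Decidable (Pre_solution maps) := by
  unfold Pre_solution; infer_instance

def pvWitness_solution : List String := ["S.L", "X.X", "E.."]

def Spec_solution (maps : List String) (out : Int) : Prop := out = solution_alt maps
instance (maps : List String) (out : Int) : Decidable (Spec_solution maps out) := by
  unfold Spec_solution; infer_instance

-- ===== CLAIM (what is proved, stated in full; the proofs are below) =====
def Claim_equal_solution : Prop :=
  ∀ (maps : List String), Dom_solution maps → Pre_solution maps →
    Spec_solution maps (solution maps)

-- ===== LEMMAS AND PROOFS =====

-- The common mathematical layer: the lever-state graph of the maze.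
-- A state is (y, x, lever) : Int × Int × Int.

def pvSrc (g : List (List Char)) (n m : Int) (σ : Int × Int × Int) : Prop :=
  0 ≤ σ.1 ∧ σ.1 < n ∧ 0 ≤ σ.2.1 ∧ σ.2.1 < m ∧ pvAt g σ.1 σ.2.1 = 'S' ∧ σ.2.2 = 0

def pvStep (g : List (List Char)) (n m : Int) (ρ σ : Int × Int × Int) : Prop :=
  (σ.1, σ.2.1) ∈ pvNbrs ρ.1 ρ.2.1 ∧
  0 ≤ σ.1 ∧ σ.1 < n ∧ 0 ≤ σ.2.1 ∧ σ.2.1 < m ∧ pvAt g σ.1 σ.2.1 ≠ 'X' ∧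
  σ.2.2 = (if pvAt g σ.1 σ.2.1 = 'L' then 1 else ρ.2.2)

-- reachable from a source in at most k steps
def pvReach (g : List (List Char)) (n m : Int) : Nat → Int × Int × Int → Prop
  | 0 => fun σ => pvSrc g n m σ
  | k + 1 => fun σ =>
      pvReach g n m k σ ∨ ∃ ρ, pvReach g n m k ρ ∧ pvStep g n m ρ σ

-- d is THE distance of σ (least k with pvReach k σ)
def pvDistEq (g : List (List Char)) (n m : Int) (σ : Int × Int × Int) (d : Nat) : Prop :=
  pvReach g n m d σ ∧ ∀ k, pvReach g n m k σ → d ≤ k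

def pvCells (n m : Int) : List (Int × Int) :=
  (PySem.List.pyRange 0 n 1).flatMap (fun i =>
    (PySem.List.pyRange 0 m 1).map (fun j => (i, j)))

def pvEnd (g : List (List Char)) (n m : Int) : Option (Int × Int) :=
  ((pvCells n m).filter (fun c => pvAt g c.1 c.2 = 'E')).getLast?

-- what both programs return: the distance of the exit-with-lever state, else -1
def pvAnsSpec (g : List (List Char)) (n m : Int) (r : Int) : Prop :=
  (pvEnd g n m = none → r = -1) ∧
  ∀ e, pvEnd g n m = some e →
    ((∀ d, pvDistEq g n m (e.1, e.2, 1) d → r = (d : Int)) ∧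
     ((¬ ∃ k, pvReach g n m k (e.1, e.2, 1)) → r = -1))

theorem pvReach_mono (g : List (List Char)) (n m : Int) {j k : Nat} (h : j ≤ k)
    {σ : Int × Int × Int} (hr : pvReach g n m j σ) : pvReach g n m k σ := by
  induction k with
  | zero => simpa [Nat.le_zero.mp h] using hr
  | succ k ih =>
    rcases Nat.lt_or_ge j (k+1) with hlt | hge
    · exact Or.inl (ih (by omega))
    · have : j = k + 1 := le_antisymm h hge
      subst this; exact hr

theorem pvDistEq_unique {g : List (List Char)} {n m : Int} {σ : Int × Int × Int}
    {d d' : Nat} (h : pvDistEq g n m σ d) (h' : pvDistEq g n m σ d') : d = d' :=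
  le_antisymm (h.2 _ h'.1) (h'.2 _ h.1)

theorem pvDistEq_exists {g : List (List Char)} {n m : Int} {σ : Int × Int × Int}
    (h : ∃ k, pvReach g n m k σ) : ∃ d, pvDistEq g n m σ d := by
  classical
  obtain ⟨k, hk⟩ := h
  induction k using Nat.strong_induction_on with
  | _ k ih =>
    by_cases hmin : ∃ j < k, pvReach g n m j σ
    · obtain ⟨j, hj, hr⟩ := hmin
      exact ih j hj hr
    · exact ⟨k, hk, fun j hj => by
        by_contra hlt
        exact hmin ⟨j, by omega, hj⟩⟩

theorem pvAnsSpec_unique {g : List (List Char)} {n m : Int} {r r' : Int}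
    (h : pvAnsSpec g n m r) (h' : pvAnsSpec g n m r') : r = r' := by
  classical
  rcases he : pvEnd g n m with _ | e
  · rw [h.1 he, h'.1 he]
  · rcases h.2 e he with ⟨h1, h2⟩
    rcases h'.2 e he with ⟨h1', h2'⟩
    by_cases hex : ∃ k, pvReach g n m k (e.1, e.2, 1)
    · obtain ⟨d, hd⟩ := pvDistEq_exists hex
      rw [h1 d hd, h1' d hd]
    · rw [h2 hex, h2' hex]

-- ===== shared facts about the maze layer =====

theorem mem_pvCells {n m : Int} {c : Int × Int} :
    c ∈ pvCells n m ↔ 0 ≤ c.1 ∧ c.1 < n ∧ 0 ≤ c.2 ∧ c.2 < m := by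
  obtain ⟨i, j⟩ := c
  simp only [pvCells, List.mem_flatMap, List.mem_map, PySem.List.mem_pyRange_one]
  constructor
  · rintro ⟨a, ⟨h1, h2⟩, b, ⟨h3, h4⟩, h⟩
    obtain ⟨rfl, rfl⟩ := Prod.mk.injEq .. ▸ h
    exact ⟨h1, h2, h3, h4⟩
  · rintro ⟨h1, h2, h3, h4⟩
    exact ⟨i, ⟨h1, h2⟩, j, ⟨h3, h4⟩, rfl⟩

theorem nodup_pvCells (n m : Int) : (pvCells n m).Nodup := by
  apply List.nodup_flatMap.mpr
  constructor
  · intro i _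
    exact (PySem.List.nodup_pyRange_one 0 m).map (fun a b h => by simpa using h)
  · apply (PySem.List.pairwise_lt_pyRange_one 0 n).imp
    intro a b hab
    simp only [List.Disjoint, List.mem_map]
    rintro x ⟨j, _, rfl⟩ ⟨j', _, h⟩
    obtain ⟨h1, h2⟩ := Prod.mk.injEq .. ▸ h
    omega

theorem foldl_pvCells {α : Type} (n m : Int) (f : α → (Int × Int) → α) (init : α) :
    (PySem.List.pyRange 0 n 1).foldl (fun s i =>
      (PySem.List.pyRange 0 m 1).foldl (fun s j => f s (i, j)) s) init =
    (pvCells n m).foldl f init := by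
  rw [pvCells, List.foldl_flatMap]
  apply PySem.List.foldl_congr_mem
  intro s i _
  rw [List.foldl_map]

theorem foldl_lastP {α : Type} (L : List α) (p : α → Bool) (e0 : Option α) :
    L.foldl (fun e c => if p c then some c else e) e0 = ((L.filter p).getLast?).or e0 := by
  induction L using List.reverseRecOn with
  | nil => simp
  | append_singleton xs x ih =>
    simp only [List.foldl_append, List.filter_append, ih, List.foldl_cons, List.foldl_nil]
    by_cases h : p x <;> simp [h, List.getLast?_append]

theorem pvReach_valid {g : List (List Char)} {n m : Int} {k : Nat} {σ : Int × Int × Int}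
    (h : pvReach g n m k σ) :
    0 ≤ σ.1 ∧ σ.1 < n ∧ 0 ≤ σ.2.1 ∧ σ.2.1 < m ∧ (σ.2.2 = 0 ∨ σ.2.2 = 1) := by
  induction k generalizing σ with
  | zero =>
    obtain ⟨h1, h2, h3, h4, _, h6⟩ := h
    exact ⟨h1, h2, h3, h4, Or.inl h6⟩
  | succ k ih =>
    rcases h with h | ⟨ρ, hρ, hs⟩
    · exact ih h
    · obtain ⟨_, h1, h2, h3, h4, _, h6⟩ := hs
      refine ⟨h1, h2, h3, h4, ?_⟩
      rw [h6]
      split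
      · exact Or.inr rfl
      · exact (ih hρ).2.2.2.2

theorem pvStep_reach_succ {g : List (List Char)} {n m : Int} {k : Nat}
    {ρ σ : Int × Int × Int} (hρ : pvReach g n m k ρ) (hs : pvStep g n m ρ σ) :
    pvReach g n m (k + 1) σ := Or.inr ⟨ρ, hρ, hs⟩

theorem pvDistEq_pred {g : List (List Char)} {n m : Int} {σ : Int × Int × Int} {d : Nat}
    (h : pvDistEq g n m σ (d + 1)) :
    ∃ ρ, pvDistEq g n m ρ d ∧ pvStep g n m ρ σ := by
  rcases h.1 with hr | ⟨ρ, hρ, hs⟩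
  · exact absurd (h.2 d hr) (by omega)
  · obtain ⟨dρ, hdρ⟩ := pvDistEq_exists ⟨d, hρ⟩
    have hle : dρ ≤ d := hdρ.2 d hρ
    have : d + 1 ≤ dρ + 1 := h.2 _ (pvStep_reach_succ hdρ.1 hs)
    have : dρ = d := by omega
    exact ⟨ρ, this ▸ hdρ, hs⟩

theorem pvDistEq_chain {g : List (List Char)} {n m : Int} {σ : Int × Int × Int} {d : Nat}
    (h : pvDistEq g n m σ d) : ∀ d' ≤ d, ∃ σ', pvDistEq g n m σ' d' := by
  induction d generalizing σ with
  | zero => intro d' hd'; exact ⟨σ, by simpa [Nat.le_zero.mp hd'] using h⟩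
  | succ d ih =>
    intro d' hd'
    rcases Nat.eq_or_lt_of_le hd' with rfl | hlt
    · exact ⟨σ, h⟩
    · obtain ⟨ρ, hρ, _⟩ := pvDistEq_pred h
      exact ih hρ d' (by omega)

theorem pvDistEq_bound {g : List (List Char)} {n m : Int} {σ : Int × Int × Int} {d : Nat}
    (h : pvDistEq g n m σ d) : d < 2 * (n.toNat * m.toNat) := by
  classical
  set F : Finset (Int × Int × Int) :=
    (Finset.Icc (0 : Int) (n - 1)) ×ˢ ((Finset.Icc (0 : Int) (m - 1)) ×ˢ ({0, 1} : Finset Int))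
    with hF
  set f : Nat → Int × Int × Int := fun d' =>
    if hex : ∃ σ', pvDistEq g n m σ' d' then Classical.choose hex else default with hf
  have hdist : ∀ d' ≤ d, pvDistEq g n m (f d') d' := by
    intro d' hd'
    have hex := pvDistEq_chain h d' hd'
    simp only [hf, dif_pos hex]
    exact Classical.choose_spec hex
  have hcard : (Finset.range (d + 1)).card ≤ F.card := by
    apply Finset.card_le_card_of_injOn f
    · intro d' hd'
      have hd := hdist d' (Nat.lt_succ_iff.mp (Finset.mem_range.mp hd'))
      have hv := pvReach_valid hd.1
      rw [hF]
      refine Finset.mem_product.mpr ⟨?_, Finset.mem_product.mpr ⟨?_, ?_⟩⟩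
      · exact Finset.mem_Icc.mpr ⟨hv.1, by omega⟩
      · exact Finset.mem_Icc.mpr ⟨hv.2.2.1, by omega⟩
      · simp only [Finset.mem_insert, Finset.mem_singleton]
        exact hv.2.2.2.2
    · intro a ha b hb hab
      have hda := hdist a (Nat.lt_succ_iff.mp (Finset.mem_range.mp ha))
      have hdb := hdist b (Nat.lt_succ_iff.mp (Finset.mem_range.mp hb))
      exact pvDistEq_unique hda (hab ▸ hdb)
  have hcF : F.card = n.toNat * (m.toNat * 2) := by
    simp only [hF, Finset.card_product, Int.card_Icc]
    have h1 : ({0, 1} : Finset Int).card = 2 := by decide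
    rw [h1]
    congr 1 <;> omega
  simp only [Finset.card_range, hcF] at hcard
  have : n.toNat * (m.toNat * 2) = 2 * (n.toNat * m.toNat) := by ring
  omega

-- ===== B-side: the relaxation loop =====

theorem pvScanB_eq (g : List (List Char)) (n m : Int) :
    pvScanB g n m =
      ((pvCells n m).foldl
        (fun d c => if pvAt g c.1 c.2 = 'S' then d.insert (c.1, c.2, 0) 0 else d)
        PySem.Dict.empty,
       (pvCells n m).foldl
        (fun e c => if pvAt g c.1 c.2 = 'E' then some c else e) none) := by
  have h0 := foldl_pvCells n m
    (fun (s : PySem.Dict (Int × Int × Int) Int × Option (Int × Int)) (c : Int × Int) =>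
      if pvAt g c.1 c.2 = 'S' then (s.1.insert (c.1, c.2, 0) 0, s.2)
      else if pvAt g c.1 c.2 = 'E' then (s.1, some c)
      else s) (PySem.Dict.empty, none)
  have hcongr : (pvCells n m).foldl
      (fun (s : PySem.Dict (Int × Int × Int) Int × Option (Int × Int)) (c : Int × Int) =>
        if pvAt g c.1 c.2 = 'S' then (s.1.insert (c.1, c.2, 0) 0, s.2)
        else if pvAt g c.1 c.2 = 'E' then (s.1, some c)
        else s) (PySem.Dict.empty, none) =
      (pvCells n m).foldl
      (fun (s : PySem.Dict (Int × Int × Int) Int × Option (Int × Int)) (c : Int × Int) =>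
        ((fun d (c : Int × Int) =>
            if pvAt g c.1 c.2 = 'S' then PySem.Dict.insert d (c.1, c.2, 0) 0 else d) s.1 c,
         (fun e (c : Int × Int) => if pvAt g c.1 c.2 = 'E' then some c else e) s.2 c))
      (PySem.Dict.empty, none) := by
    apply PySem.List.foldl_congr_mem
    intro s c _
    by_cases hS : pvAt g c.1 c.2 = 'S'
    · simp [hS]
    · by_cases hE : pvAt g c.1 c.2 = 'E' <;> simp [hS, hE]
  rw [pvScanB]
  refine h0.trans (hcongr.trans ?_)
  exact PySem.List.foldl_prod_mk
    (f := fun d (c : Int × Int) =>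
      if pvAt g c.1 c.2 = 'S' then PySem.Dict.insert d (c.1, c.2, 0) 0 else d)
    (g := fun e (c : Int × Int) => if pvAt g c.1 c.2 = 'E' then some c else e)
    (l := pvCells n m) (a := PySem.Dict.empty) (b := none)

def pvSrcCells (g : List (List Char)) (n m : Int) : List (Int × Int) :=
  (pvCells n m).filter (fun c => pvAt g c.1 c.2 = 'S')

theorem pvScanB_dict_items (g : List (List Char)) (n m : Int) :
    (pvScanB g n m).1.items = (pvSrcCells g n m).map (fun c => ((c.1, c.2, (0 : Int)), (0 : Int))) := by
  rw [pvScanB_eq]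
  simp only
  rw [PySem.List.foldl_ite_eq_foldl_filter]
  have h := PySem.Dict.items_foldl_insert_fresh
    (l := (pvCells n m).filter (fun c => decide (pvAt g c.1 c.2 = 'S')))
    (k := fun (c : Int × Int) => ((c.1, c.2, (0 : Int)) : Int × Int × Int))
    (v := fun _ => (0 : Int)) (d := PySem.Dict.empty)
    (by intro a _; simp [PySem.Dict.contains_empty])
    (by
      apply List.Nodup.map
      · intro a b hab
        simp only [Prod.ext_iff] at hab
        exact Prod.ext hab.1 hab.2.1
      · exact (nodup_pvCells n m).filter _)
  exact h.trans (by simp [pvSrcCells, PySem.Dict.empty])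

theorem pvScanB_keys_nodup (g : List (List Char)) (n m : Int) :
    (pvScanB g n m).1.keys.Nodup := by
  have h : (pvScanB g n m).1.keys =
      ((pvSrcCells g n m).map (fun c => ((c.1, c.2, (0 : Int)), (0 : Int)))).map (·.1) := by
    simp only [PySem.Dict.keys, pvScanB_dict_items]
  rw [h, List.map_map]
  apply List.Nodup.map
  · intro a b hab
    simp only [Function.comp, Prod.ext_iff] at hab
    exact Prod.ext hab.1 hab.2.1
  · exact (nodup_pvCells n m).filter _

theorem pvScanB_dict_get? (g : List (List Char)) (n m : Int) (σ : Int × Int × Int) (d : Int) :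
    (pvScanB g n m).1.get? σ = some d ↔ pvSrc g n m σ ∧ d = 0 := by
  rw [PySem.Dict.get?_eq_some_iff_mem_items _ _ _ (pvScanB_keys_nodup g n m),
    pvScanB_dict_items]
  simp only [List.mem_map, pvSrcCells, List.mem_filter, decide_eq_true_eq, mem_pvCells]
  constructor
  · rintro ⟨c, ⟨⟨hb1, hb2, hb3, hb4⟩, hS⟩, h⟩
    simp only [Prod.ext_iff] at h
    obtain ⟨⟨h1, h2, h3⟩, h4⟩ := h
    refine ⟨⟨?_, ?_, ?_, ?_, ?_, ?_⟩, h4.symm⟩ <;> simp_all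
  · rintro ⟨⟨hb1, hb2, hb3, hb4, hS, hl⟩, rfl⟩
    refine ⟨(σ.1, σ.2.1), ⟨⟨hb1, hb2, hb3, hb4⟩, hS⟩, ?_⟩
    simp [hl.symm]

theorem pvScanB_end (g : List (List Char)) (n m : Int) :
    (pvScanB g n m).2 = pvEnd g n m := by
  rw [pvScanB_eq, pvEnd]
  simp only
  have h := foldl_lastP (pvCells n m) (fun c => decide (pvAt g c.1 c.2 = 'E')) none
  simpa [Option.or_none] using h

-- dp after k rounds: exactly the states reachable within k steps, at their exact distance
def pvDpInv (g : List (List Char)) (n m : Int) (k : Nat)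
    (dp : PySem.Dict (Int × Int × Int) Int) : Prop :=
  dp.keys.Nodup ∧
  ∀ σ d, dp.get? σ = some d ↔
    ∃ dn : Nat, d = (dn : Int) ∧ pvDistEq g n m σ dn ∧ pvReach g n m k σ

-- the same with part of one pass applied: P are the already-processed source states
def pvOldC (g : List (List Char)) (n m : Int) (k : Nat) (P : List (Int × Int × Int))
    (σ : Int × Int × Int) : Prop :=
  pvReach g n m k σ ∨ ∃ ρ ∈ P, pvReach g n m k ρ ∧ pvStep g n m ρ σ

def pvRMid (g : List (List Char)) (n m : Int) (k : Nat) (P : List (Int × Int × Int))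
    (s : PySem.Dict (Int × Int × Int) Int × Bool) : Prop :=
  s.1.keys.Nodup ∧
  (∀ σ d, s.1.get? σ = some d ↔
    ∃ dn : Nat, d = (dn : Int) ∧ pvDistEq g n m σ dn ∧ pvOldC g n m k P σ) ∧
  (s.2 = false → ∀ σ d, s.1.get? σ = some d → pvReach g n m k σ)

-- mid-state while the inner neighbour loop of one item (state ρ) runs; N = processed cells
def pvIMid (g : List (List Char)) (n m : Int) (k : Nat) (P : List (Int × Int × Int))
    (ρ : Int × Int × Int) (N : List (Int × Int))
    (s : PySem.Dict (Int × Int × Int) Int × Bool) : Prop :=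
  s.1.keys.Nodup ∧
  (∀ σ d, s.1.get? σ = some d ↔
    ∃ dn : Nat, d = (dn : Int) ∧ pvDistEq g n m σ dn ∧
      (pvOldC g n m k P σ ∨ (pvStep g n m ρ σ ∧ (σ.1, σ.2.1) ∈ N))) ∧
  (s.2 = false → ∀ σ d, s.1.get? σ = some d → pvReach g n m k σ)

theorem pvStep_cell_unique {g : List (List Char)} {n m : Int} {ρ σ σ' : Int × Int × Int}
    (h : pvStep g n m ρ σ) (h' : pvStep g n m ρ σ')
    (hc : (σ.1, σ.2.1) = (σ'.1, σ'.2.1)) : σ = σ' := by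
  simp only [Prod.ext_iff] at hc
  refine Prod.ext hc.1 (Prod.ext hc.2 ?_)
  rw [h.2.2.2.2.2.2, h'.2.2.2.2.2.2, hc.1, hc.2]

theorem pvIMid_step (g : List (List Char)) (n m : Int) (k : Nat) (P : List (Int × Int × Int))
    (it : (Int × Int × Int) × Int) (dρ : Nat)
    (hv : it.2 = (dρ : Int)) (hd : pvDistEq g n m it.1 dρ) (hk : pvReach g n m k it.1)
    (N : List (Int × Int)) (s : PySem.Dict (Int × Int × Int) Int × Bool)
    (h : pvIMid g n m k P it.1 N s) (nb : Int × Int)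
    (hnb : nb ∈ pvNbrs it.1.1 it.1.2.1) :
    pvIMid g n m k P it.1 (N ++ [nb]) (pvRelaxCell g n m it s nb) := by
  classical
  have hdρk : dρ ≤ k := hd.2 k hk
  obtain ⟨hnod, hiff, hflag⟩ := h
  rw [pvRelaxCell]
  simp only
  by_cases hg : 0 ≤ nb.1 ∧ nb.1 < n ∧ 0 ≤ nb.2 ∧ nb.2 < m ∧ pvAt g nb.1 nb.2 ≠ 'X'
  case neg =>
    rw [if_neg hg]
    refine ⟨hnod, ?_, hflag⟩
    intro σ d
    rw [hiff σ d]
    constructor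
    · rintro ⟨dn, h1, h2, h3⟩
      refine ⟨dn, h1, h2, ?_⟩
      rcases h3 with h3 | ⟨hs, hN⟩
      · exact Or.inl h3
      · exact Or.inr ⟨hs, List.mem_append_left _ hN⟩
    · rintro ⟨dn, h1, h2, h3⟩
      refine ⟨dn, h1, h2, ?_⟩
      rcases h3 with h3 | ⟨hs, hN⟩
      · exact Or.inl h3
      · rcases List.mem_append.mp hN with hN | hN
        · exact Or.inr ⟨hs, hN⟩
        · exfalso
          apply hg
          have hcell : (σ.1, σ.2.1) = nb := by simpa using hN
          simp only [Prod.ext_iff] at hcell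
          rw [← hcell.1, ← hcell.2]
          exact ⟨hs.2.1, hs.2.2.1, hs.2.2.2.1, hs.2.2.2.2.1, hs.2.2.2.2.2.1⟩
  case pos =>
    rw [if_pos hg]
    set nl : Int := if pvAt g nb.1 nb.2 = 'L' then 1 else it.1.2.2 with hnl
    set σt : Int × Int × Int := (nb.1, nb.2, nl) with hσt
    have hstep : pvStep g n m it.1 σt := by
      refine ⟨by simpa [hσt] using hnb, hg.1, hg.2.1, hg.2.2.1, hg.2.2.2.1, hg.2.2.2.2, ?_⟩
      simp [hσt, hnl]
    have huniq : ∀ σ, pvStep g n m it.1 σ → (σ.1, σ.2.1) = nb → σ = σt :=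
      fun σ hs hc => pvStep_cell_unique hs hstep (by simp [hσt, hc])
    have hreachσ : pvReach g n m (dρ + 1) σt := pvStep_reach_succ hd.1 hstep
    obtain ⟨dσ, hdσ⟩ := pvDistEq_exists ⟨dρ + 1, hreachσ⟩
    have hdσle : dσ ≤ dρ + 1 := hdσ.2 _ hreachσ
    have hext : ∀ σ, σ ≠ σt →
        ((pvOldC g n m k P σ ∨ (pvStep g n m it.1 σ ∧ (σ.1, σ.2.1) ∈ N)) ↔
         (pvOldC g n m k P σ ∨ (pvStep g n m it.1 σ ∧ (σ.1, σ.2.1) ∈ N ++ [nb]))) := by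
      intro σ hne
      constructor
      · rintro (h3 | ⟨hs, hN⟩)
        · exact Or.inl h3
        · exact Or.inr ⟨hs, List.mem_append_left _ hN⟩
      · rintro (h3 | ⟨hs, hN⟩)
        · exact Or.inl h3
        · rcases List.mem_append.mp hN with hN | hN
          · exact Or.inr ⟨hs, hN⟩
          · exact absurd (huniq σ hs (by simpa using hN)) hne
    rcases hlook : s.1.get? σt with _ | old
    · -- new state: it gets distance dρ+1, and that IS its distance
      have hnotcond : ¬ (pvOldC g n m k P σt ∨
          (pvStep g n m it.1 σt ∧ (σt.1, σt.2.1) ∈ N)) := by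
        intro hcond
        have h2 := (hiff σt (dσ : Int)).mpr ⟨dσ, rfl, hdσ, hcond⟩
        rw [hlook] at h2
        simp at h2
      have hnotk : ¬ pvReach g n m k σt := fun hr => hnotcond (Or.inl (Or.inl hr))
      have hdσk : k < dσ := by
        by_contra hle
        exact hnotk (pvReach_mono g n m (by omega) hdσ.1)
      have hdσeq : dσ = dρ + 1 := by omega
      refine ⟨PySem.Dict.nodup_keys_insert _ _ _ hnod, ?_, by simp⟩
      intro σ d
      rw [PySem.Dict.get?_insert]
      by_cases hσ : σ = σt
      · subst hσ
        rw [if_pos rfl]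
        constructor
        · rintro h2
          have hde : d = it.2 + 1 := by injection h2 with h2; exact h2.symm
          subst hde
          refine ⟨dρ + 1, by rw [hv]; push_cast; ring, hdσeq ▸ hdσ,
            Or.inr ⟨hstep, List.mem_append_right _ (by simp [hσt])⟩⟩
        · rintro ⟨dn, h1, h2, _⟩
          have h3 : dn = dσ := pvDistEq_unique h2 hdσ
          rw [h1, h3, hdσeq, hv]
          norm_num
      · rw [if_neg hσ, hiff σ d]
        constructor
        · rintro ⟨dn, h1, h2, h3⟩
          exact ⟨dn, h1, h2, (hext σ hσ).mp h3⟩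
        · rintro ⟨dn, h1, h2, h3⟩
          exact ⟨dn, h1, h2, (hext σ hσ).mpr h3⟩
    · -- already present: its stored value is its exact distance ≤ dρ+1, no overwrite
      obtain ⟨dn0, hdn0, hdist0, hc0⟩ := (hiff σt old).mp hlook
      have hdn0σ : dn0 = dσ := pvDistEq_unique hdist0 hdσ
      have hnotgt : ¬ (old > it.2 + 1) := by
        rw [hdn0, hv, hdn0σ]
        omega
      show pvIMid g n m k P it.1 (N ++ [nb])
        (if old > it.2 + 1 then (s.1.insert σt (it.2 + 1), true) else s)
      rw [if_neg hnotgt]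
      refine ⟨hnod, ?_, hflag⟩
      intro σ d
      rw [hiff σ d]
      by_cases hσ : σ = σt
      · subst hσ
        constructor
        · rintro ⟨dn, h1, h2, h3⟩
          refine ⟨dn, h1, h2, ?_⟩
          rcases h3 with h3 | ⟨hs, hN⟩
          · exact Or.inl h3
          · exact Or.inr ⟨hs, List.mem_append_left _ hN⟩
        · rintro ⟨dn, h1, h2, _⟩
          exact ⟨dn, h1, h2, hc0⟩
      · constructor
        · rintro ⟨dn, h1, h2, h3⟩
          exact ⟨dn, h1, h2, (hext σ hσ).mp h3⟩
        · rintro ⟨dn, h1, h2, h3⟩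
          exact ⟨dn, h1, h2, (hext σ hσ).mpr h3⟩

theorem pvIMid_fold (g : List (List Char)) (n m : Int) (k : Nat) (P : List (Int × Int × Int))
    (it : (Int × Int × Int) × Int) (dρ : Nat)
    (hv : it.2 = (dρ : Int)) (hd : pvDistEq g n m it.1 dρ) (hk : pvReach g n m k it.1) :
    ∀ (L N : List (Int × Int)) (s : PySem.Dict (Int × Int × Int) Int × Bool),
      (∀ nb ∈ L, nb ∈ pvNbrs it.1.1 it.1.2.1) →
      pvIMid g n m k P it.1 N s →
      pvIMid g n m k P it.1 (N ++ L) (L.foldl (pvRelaxCell g n m it) s) := by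
  intro L
  induction L with
  | nil => intro N s _ h; simpa using h
  | cons nb L ih =>
    intro N s hmem h
    have h1 := pvIMid_step g n m k P it dρ hv hd hk N s h nb (hmem nb (by simp))
    have h2 := ih (N ++ [nb]) (pvRelaxCell g n m it s nb)
      (fun x hx => hmem x (by simp [hx])) h1
    simpa using h2

theorem pvRMid_item (g : List (List Char)) (n m : Int) (k : Nat) (P : List (Int × Int × Int))
    (it : (Int × Int × Int) × Int) (dρ : Nat)
    (hv : it.2 = (dρ : Int)) (hd : pvDistEq g n m it.1 dρ) (hk : pvReach g n m k it.1)
    (s : PySem.Dict (Int × Int × Int) Int × Bool) (h : pvRMid g n m k P s) :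
    pvRMid g n m k (P ++ [it.1])
      ((pvNbrs it.1.1 it.1.2.1).foldl (pvRelaxCell g n m it) s) := by
  have h0 : pvIMid g n m k P it.1 [] s := by
    obtain ⟨h1, h2, h3⟩ := h
    refine ⟨h1, ?_, h3⟩
    intro σ d
    rw [h2 σ d]
    constructor
    · rintro ⟨dn, ha, hb, hc⟩; exact ⟨dn, ha, hb, Or.inl hc⟩
    · rintro ⟨dn, ha, hb, hc | ⟨_, hmem⟩⟩
      · exact ⟨dn, ha, hb, hc⟩
      · simp at hmem
  have hfold := pvIMid_fold g n m k P it dρ hv hd hk (pvNbrs it.1.1 it.1.2.1) [] s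
    (fun _ hx => hx) h0
  obtain ⟨h1, h2, h3⟩ := hfold
  refine ⟨h1, ?_, h3⟩
  intro σ d
  rw [h2 σ d]
  have hcond : ∀ σ, ((pvOldC g n m k P σ ∨
      (pvStep g n m it.1 σ ∧ (σ.1, σ.2.1) ∈ [] ++ pvNbrs it.1.1 it.1.2.1)) ↔
      pvOldC g n m k (P ++ [it.1]) σ) := by
    intro σ
    constructor
    · rintro (hc | ⟨hs, _⟩)
      · rcases hc with hc | ⟨ρ', hρ', hr, hs'⟩
        · exact Or.inl hc
        · exact Or.inr ⟨ρ', List.mem_append_left _ hρ', hr, hs'⟩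
      · exact Or.inr ⟨it.1, List.mem_append_right _ (by simp), hk, hs⟩
    · rintro (hc | ⟨ρ', hρ', hr, hs'⟩)
      · exact Or.inl (Or.inl hc)
      · rcases List.mem_append.mp hρ' with hρ' | hρ'
        · exact Or.inl (Or.inr ⟨ρ', hρ', hr, hs'⟩)
        · have : ρ' = it.1 := by simpa using hρ'
          subst this
          exact Or.inr ⟨hs', hs'.1⟩
  constructor
  · rintro ⟨dn, ha, hb, hc⟩; exact ⟨dn, ha, hb, (hcond σ).mp hc⟩
  · rintro ⟨dn, ha, hb, hc⟩; exact ⟨dn, ha, hb, (hcond σ).mpr hc⟩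

theorem pvRMid_items (g : List (List Char)) (n m : Int) (k : Nat) :
    ∀ (L : List ((Int × Int × Int) × Int)) (P : List (Int × Int × Int))
      (s : PySem.Dict (Int × Int × Int) Int × Bool),
      (∀ it ∈ L, ∃ dn : Nat, it.2 = (dn : Int) ∧ pvDistEq g n m it.1 dn ∧ pvReach g n m k it.1) →
      pvRMid g n m k P s →
      pvRMid g n m k (P ++ L.map (·.1))
        (L.foldl (fun s it => (pvNbrs it.1.1 it.1.2.1).foldl (pvRelaxCell g n m it) s) s) := by
  intro L
  induction L with
  | nil => intro P s _ h; simpa using h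
  | cons it L ih =>
    intro P s hL h
    obtain ⟨dn, hv, hd, hk⟩ := hL it (by simp)
    have h1 := pvRMid_item g n m k P it dn hv hd hk s h
    have h2 := ih (P ++ [it.1]) _ (fun x hx => hL x (by simp [hx])) h1
    simpa using h2

theorem pvRelax_spec (g : List (List Char)) (n m : Int) (k : Nat)
    (dp : PySem.Dict (Int × Int × Int) Int) (hdp : pvDpInv g n m k dp) :
    pvDpInv g n m (k + 1) (pvRelax g n m dp).1 ∧
    ((pvRelax g n m dp).2 = false →
      ∀ σ, pvReach g n m (k + 1) σ → pvReach g n m k σ) := by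
  classical
  have hvals : ∀ it ∈ dp.items, ∃ dn : Nat, it.2 = (dn : Int) ∧
      pvDistEq g n m it.1 dn ∧ pvReach g n m k it.1 := by
    rintro ⟨σ, d⟩ hit
    have hg : dp.get? σ = some d := PySem.Dict.get?_of_mem_items _ hit hdp.1
    obtain ⟨dn, h1, h2, h3⟩ := (hdp.2 σ d).mp hg
    exact ⟨dn, h1, h2, h3⟩
  have hinit : pvRMid g n m k [] (dp, false) := by
    refine ⟨hdp.1, ?_, ?_⟩
    · intro σ d
      rw [hdp.2 σ d]
      constructor
      · rintro ⟨dn, h1, h2, h3⟩; exact ⟨dn, h1, h2, Or.inl h3⟩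
      · rintro ⟨dn, h1, h2, h3 | ⟨ρ, hρ, _⟩⟩
        · exact ⟨dn, h1, h2, h3⟩
        · simp at hρ
    · intro _ σ d hg
      obtain ⟨dn, _, _, hr⟩ := (hdp.2 σ d).mp hg
      exact hr
  have hfold := pvRMid_items g n m k dp.items [] (dp, false) hvals hinit
  rw [pvRelax]
  obtain ⟨h1, h2, h3⟩ := hfold
  -- the processed states are precisely all states reachable within k steps
  have hPiff : ∀ σ, pvOldC g n m k ([] ++ dp.items.map (·.1)) σ ↔ pvReach g n m (k + 1) σ := by
    intro σ
    constructor
    · rintro (hc | ⟨ρ, _, hr, hs⟩)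
      · exact Or.inl hc
      · exact Or.inr ⟨ρ, hr, hs⟩
    · rintro (hc | ⟨ρ, hr, hs⟩)
      · exact Or.inl hc
      · refine Or.inr ⟨ρ, ?_, hr, hs⟩
        obtain ⟨dρ, hdρ⟩ := pvDistEq_exists ⟨k, hr⟩
        have hg : dp.get? ρ = some (dρ : Int) := (hdp.2 ρ _).mpr ⟨dρ, rfl, hdρ, hr⟩
        have hmem := PySem.Dict.mem_items_of_get?_eq_some _ hg
        simpa using List.mem_map_of_mem (f := (·.1)) hmem
  constructor
  · refine ⟨h1, ?_⟩
    intro σ d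
    rw [h2 σ d]
    constructor
    · rintro ⟨dn, ha, hb, hc⟩; exact ⟨dn, ha, hb, (hPiff σ).mp hc⟩
    · rintro ⟨dn, ha, hb, hc⟩; exact ⟨dn, ha, hb, (hPiff σ).mpr hc⟩
  · intro hfalse σ hr
    obtain ⟨dσ, hdσ⟩ := pvDistEq_exists ⟨k + 1, hr⟩
    have hg := (h2 σ (dσ : Int)).mpr ⟨dσ, rfl, hdσ, (hPiff σ).mpr hr⟩
    exact h3 hfalse σ _ hg

-- the final dict: exactly the reachable states at their exact distances
def pvGood (g : List (List Char)) (n m : Int) (dp : PySem.Dict (Int × Int × Int) Int) : Prop :=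
  ∀ σ d, dp.get? σ = some d ↔ ∃ dn : Nat, d = (dn : Int) ∧ pvDistEq g n m σ dn

theorem pvReach_of_fix {g : List (List Char)} {n m : Int} {j : Nat}
    (hfix : ∀ σ, pvReach g n m (j + 1) σ → pvReach g n m j σ) :
    ∀ kk σ, pvReach g n m kk σ → pvReach g n m j σ := by
  intro kk
  induction kk with
  | zero => intro σ h; exact pvReach_mono g n m (Nat.zero_le j) h
  | succ kk ih =>
    intro σ h
    rcases h with h | ⟨ρ, hρ, hs⟩
    · exact ih σ h
    · exact hfix σ (Or.inr ⟨ρ, ih ρ hρ, hs⟩)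

theorem pvRounds_good (g : List (List Char)) (n m : Int) :
    ∀ (kk j : Nat) (dp : PySem.Dict (Int × Int × Int) Int),
      pvDpInv g n m j dp → 2 * (n.toNat * m.toNat) ≤ j + kk →
      pvGood g n m (pvRounds g n m kk dp) := by
  intro kk
  induction kk with
  | zero =>
    intro j dp hdp hle σ d
    rw [pvRounds, hdp.2 σ d]
    constructor
    · rintro ⟨dn, h1, h2, _⟩; exact ⟨dn, h1, h2⟩
    · rintro ⟨dn, h1, h2⟩
      refine ⟨dn, h1, h2, pvReach_mono g n m ?_ h2.1⟩
      have := pvDistEq_bound h2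
      omega
  | succ kk ih =>
    intro j dp hdp hle
    rw [pvRounds]
    obtain ⟨hinv, hfix⟩ := pvRelax_spec g n m j dp hdp
    by_cases hch : (pvRelax g n m dp).2
    · simp only [hch, if_true]
      exact ih (j + 1) _ hinv (by omega)
    · have hchf : (pvRelax g n m dp).2 = false := by simpa using hch
      rw [if_neg hch]
      intro σ d
      rw [hinv.2 σ d]
      constructor
      · rintro ⟨dn, h1, h2, _⟩; exact ⟨dn, h1, h2⟩
      · rintro ⟨dn, h1, h2⟩
        refine ⟨dn, h1, h2, ?_⟩
        exact pvReach_mono g n m (Nat.le_succ j) (pvReach_of_fix (hfix hchf) dn σ h2.1)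

-- ===== A-side: the visited array =====

def pvMarked (v : List (List (List Bool))) (σ : Int × Int × Int) : Prop :=
  0 ≤ σ.1 ∧ 0 ≤ σ.2.1 ∧ 0 ≤ σ.2.2 ∧ pvVGet v σ.1 σ.2.1 σ.2.2 = true

def pvVShape (v : List (List (List Bool))) (n m : Int) : Prop :=
  v.length = n.toNat ∧
  ∀ i : Nat, i < n.toNat →
    (v.getD i []).length = m.toNat ∧
    ∀ j : Nat, j < m.toNat → ((v.getD i []).getD j []).length = 2

theorem pvGetD_set_eq {α : Type} (l : List α) (i : Nat) (hi : i < l.length) (a d : α) :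
    (l.set i a).getD i d = a := by
  rw [List.getD_eq_getElem?_getD, List.getElem?_set_self hi]
  rfl

theorem pvGetD_set_ne {α : Type} (l : List α) (i j : Nat) (h : i ≠ j) (a d : α) :
    (l.set i a).getD j d = l.getD j d := by
  rw [List.getD_eq_getElem?_getD, List.getElem?_set_ne h, ← List.getD_eq_getElem?_getD]

theorem pvVShape_replicate (n m : Int) :
    pvVShape (List.replicate n.toNat (List.replicate m.toNat [false, false])) n m := by
  refine ⟨List.length_replicate, ?_⟩
  intro i hi
  have hrow : (List.replicate n.toNat (List.replicate m.toNat [false, false])).getD i [] =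
      List.replicate m.toNat [false, false] := by
    rw [List.getD_eq_getElem?_getD, List.getElem?_replicate, if_pos hi]
    rfl
  rw [hrow]
  refine ⟨List.length_replicate, ?_⟩
  intro j hj
  rw [List.getD_eq_getElem?_getD, List.getElem?_replicate, if_pos hj]
  rfl

theorem pvVShape_set {v : List (List (List Bool))} {n m : Int} (h : pvVShape v n m)
    {y x l : Int} (hy : 0 ≤ y) (hyn : y < n) (hx : 0 ≤ x) (hxm : x < m)
    (_hl : l = 0 ∨ l = 1) : pvVShape (pvVSet v y x l) n m := by
  have hylen : y.toNat < v.length := by rw [h.1]; omega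
  have hrow := h.2 y.toNat (by omega)
  have hxlen : x.toNat < (v.getD y.toNat []).length := by rw [hrow.1]; omega
  refine ⟨by rw [pvVSet, List.length_set]; exact h.1, ?_⟩
  intro i hi
  by_cases hiy : i = y.toNat
  · subst hiy
    rw [pvVSet, pvGetD_set_eq _ _ hylen]
    constructor
    · rw [List.length_set]; exact hrow.1
    · intro j hj
      by_cases hjx : j = x.toNat
      · subst hjx
        rw [pvGetD_set_eq _ _ hxlen, List.length_set]
        exact hrow.2 _ hj
      · rw [pvGetD_set_ne _ _ _ (fun hh => hjx hh.symm)]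
        exact hrow.2 j hj
  · rw [pvVSet, pvGetD_set_ne _ _ _ (fun hh => hiy hh.symm)]
    exact h.2 i hi

theorem pvVGet_set_self {v : List (List (List Bool))} {n m : Int} (h : pvVShape v n m)
    {y x l : Int} (hy : 0 ≤ y) (hyn : y < n) (hx : 0 ≤ x) (hxm : x < m)
    (hl : l = 0 ∨ l = 1) : pvVGet (pvVSet v y x l) y x l = true := by
  have hylen : y.toNat < v.length := by rw [h.1]; omega
  have hrow := h.2 y.toNat (by omega)
  have hxlen : x.toNat < (v.getD y.toNat []).length := by rw [hrow.1]; omega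
  have hllen : l.toNat < ((v.getD y.toNat []).getD x.toNat []).length := by
    rw [hrow.2 x.toNat (by omega)]; omega
  rw [pvVGet, pvVSet, pvGetD_set_eq _ _ hylen, pvGetD_set_eq _ _ hxlen,
    pvGetD_set_eq _ _ hllen]

theorem pvVGet_set_other {v : List (List (List Bool))} {n m : Int} (h : pvVShape v n m)
    {y x l y' x' l' : Int} (hy : 0 ≤ y) (hyn : y < n) (hx : 0 ≤ x) (hxm : x < m)
    (_hl : l = 0 ∨ l = 1) (hy' : 0 ≤ y') (hx' : 0 ≤ x') (hl' : 0 ≤ l')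
    (hne : ¬(y' = y ∧ x' = x ∧ l' = l)) :
    pvVGet (pvVSet v y x l) y' x' l' = pvVGet v y' x' l' := by
  have hylen : y.toNat < v.length := by rw [h.1]; omega
  by_cases hyy : y' = y
  · subst hyy
    have hxlen : x.toNat < (v.getD y'.toNat []).length := by
      rw [(h.2 y'.toNat (by omega)).1]; omega
    by_cases hxx : x' = x
    · subst hxx
      have hll : l' ≠ l := fun hh => hne ⟨rfl, rfl, hh⟩
      rw [pvVGet, pvVSet, pvGetD_set_eq _ _ hylen, pvGetD_set_eq _ _ hxlen, pvVGet,
        pvGetD_set_ne]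
      omega
    · rw [pvVGet, pvVSet, pvGetD_set_eq _ _ hylen, pvGetD_set_ne, pvVGet]
      omega
  · rw [pvVGet, pvVSet, pvGetD_set_ne, pvVGet]
    omega

theorem pvMarked_set {v : List (List (List Bool))} {n m : Int} (h : pvVShape v n m)
    {y x l : Int} (hy : 0 ≤ y) (hyn : y < n) (hx : 0 ≤ x) (hxm : x < m)
    (hl : l = 0 ∨ l = 1) (σ : Int × Int × Int) :
    pvMarked (pvVSet v y x l) σ ↔ pvMarked v σ ∨ σ = (y, x, l) := by
  by_cases hσ : σ = (y, x, l)
  · subst hσ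
    simp only [pvMarked]
    constructor
    · intro _; exact Or.inr trivial
    · intro _
      exact ⟨hy, hx, by rcases hl with rfl | rfl <;> norm_num,
        pvVGet_set_self h hy hyn hx hxm hl⟩
  · constructor
    · rintro ⟨h1, h2, h3, h4⟩
      refine Or.inl ⟨h1, h2, h3, ?_⟩
      rw [← h4]
      exact (pvVGet_set_other h hy hyn hx hxm hl h1 h2 h3 (fun hh => hσ (by
        obtain ⟨a, b, c⟩ := hh
        exact Prod.ext a (Prod.ext b c)))).symm
    · rintro (⟨h1, h2, h3, h4⟩ | rfl)
      · refine ⟨h1, h2, h3, ?_⟩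
        rw [pvVGet_set_other h hy hyn hx hxm hl h1 h2 h3 (fun hh => hσ (by
          obtain ⟨a, b, c⟩ := hh
          exact Prod.ext a (Prod.ext b c)))]
        exact h4
      · exact absurd rfl hσ

-- the queue entries appended while popping (y, x, lv, t), and the marking they perform
def pvAppends (g : List (List Char)) (n m : Int) (v : List (List (List Bool)))
    (y x lv t : Int) : List (Int × Int × Int × Int) :=
  pvDirs.filterMap (fun d =>
    let ny := y + d.1
    let nx := x + d.2
    if 0 ≤ ny ∧ ny < n ∧ 0 ≤ nx ∧ nx < m ∧ pvVGet v ny nx lv = false ∧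
        pvAt g ny nx ≠ 'X' then
      some (ny, nx, (if pvAt g ny nx = 'L' then 1 else lv), t + 1)
    else none)

def pvDoMarks (v : List (List (List Bool))) (A : List (Int × Int × Int × Int)) :
    List (List (List Bool)) :=
  A.foldl (fun v a => pvVSet v a.1 a.2.1 a.2.2.1) v

theorem pvVShape_doMarks {v : List (List (List Bool))} {n m : Int}
    (A : List (Int × Int × Int × Int)) (h : pvVShape v n m)
    (hA : ∀ a ∈ A, 0 ≤ a.1 ∧ a.1 < n ∧ 0 ≤ a.2.1 ∧ a.2.1 < m ∧ (a.2.2.1 = 0 ∨ a.2.2.1 = 1)) :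
    pvVShape (pvDoMarks v A) n m := by
  induction A generalizing v with
  | nil => exact h
  | cons a A ih =>
    obtain ⟨h1, h2, h3, h4, h5⟩ := hA a (by simp)
    exact ih (pvVShape_set h h1 h2 h3 h4 h5) (fun a ha => hA a (by simp [ha]))

theorem pvMarked_doMarks {v : List (List (List Bool))} {n m : Int}
    (A : List (Int × Int × Int × Int)) (h : pvVShape v n m)
    (hA : ∀ a ∈ A, 0 ≤ a.1 ∧ a.1 < n ∧ 0 ≤ a.2.1 ∧ a.2.1 < m ∧ (a.2.2.1 = 0 ∨ a.2.2.1 = 1))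
    (σ : Int × Int × Int) :
    pvMarked (pvDoMarks v A) σ ↔ pvMarked v σ ∨ ∃ a ∈ A, (a.1, a.2.1, a.2.2.1) = σ := by
  induction A generalizing v with
  | nil => simp [pvDoMarks]
  | cons a A ih =>
    obtain ⟨h1, h2, h3, h4, h5⟩ := hA a (by simp)
    have hstep := pvMarked_set h h1 h2 h3 h4 h5 σ
    have hfold : pvDoMarks v (a :: A) = pvDoMarks (pvVSet v a.1 a.2.1 a.2.2.1) A := rfl
    rw [hfold, ih (pvVShape_set h h1 h2 h3 h4 h5) (fun a ha => hA a (by simp [ha])), hstep]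
    constructor
    · rintro ((hm | rfl) | ⟨a', ha', rfl⟩)
      · exact Or.inl hm
      · exact Or.inr ⟨a, by simp⟩
      · exact Or.inr ⟨a', by simp [ha']⟩
    · rintro (hm | ⟨a', ha', rfl⟩)
      · exact Or.inl (Or.inl hm)
      · rcases List.mem_cons.mp ha' with rfl | ha'
        · exact Or.inl (Or.inr rfl)
        · exact Or.inr ⟨a', ha', rfl⟩

-- the per-direction append candidate, relative to a fixed visited array
def pvAppF (g : List (List Char)) (n m : Int) (v : List (List (List Bool)))
    (y x lv t : Int) (d : Int × Int) : Option (Int × Int × Int × Int) :=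
  let ny := y + d.1
  let nx := x + d.2
  if 0 ≤ ny ∧ ny < n ∧ 0 ≤ nx ∧ nx < m ∧ pvVGet v ny nx lv = false ∧
      pvAt g ny nx ≠ 'X' then
    some (ny, nx, (if pvAt g ny nx = 'L' then 1 else lv), t + 1)
  else none

theorem pvAppends_eq_filterMap (g : List (List Char)) (n m : Int)
    (v : List (List (List Bool))) (y x lv t : Int) :
    pvAppends g n m v y x lv t = pvDirs.filterMap (pvAppF g n m v y x lv t) := rfl

theorem pvAppF_cell {g : List (List Char)} {n m : Int} {v : List (List (List Bool))}
    {y x lv t : Int} {d : Int × Int} {a : Int × Int × Int × Int}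
    (h : pvAppF g n m v y x lv t d = some a) :
    a = (y + d.1, x + d.2, (if pvAt g (y + d.1) (x + d.2) = 'L' then 1 else lv), t + 1) ∧
    0 ≤ y + d.1 ∧ y + d.1 < n ∧ 0 ≤ x + d.2 ∧ x + d.2 < m ∧
    pvVGet v (y + d.1) (x + d.2) lv = false ∧ pvAt g (y + d.1) (x + d.2) ≠ 'X' := by
  simp only [pvAppF] at h
  split at h
  · exact ⟨(Option.some.injEq .. ▸ h).symm, by assumption⟩
  · simp at h

theorem pvAppF_congr_at {g : List (List Char)} {n m : Int}
    {v : List (List (List Bool))} (hsh : pvVShape v n m) {y x lv t cy cx nl : Int}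
    (hc1 : 0 ≤ cy) (hc2 : cy < n) (hc3 : 0 ≤ cx) (hc4 : cx < m) (hnl : nl = 0 ∨ nl = 1)
    (hlv : lv = 0 ∨ lv = 1) (d : Int × Int) (hne : ¬(y + d.1 = cy ∧ x + d.2 = cx)) :
    pvAppF g n m (pvVSet v cy cx nl) y x lv t d = pvAppF g n m v y x lv t d := by
  simp only [pvAppF]
  by_cases hb : 0 ≤ y + d.1 ∧ y + d.1 < n ∧ 0 ≤ x + d.2 ∧ x + d.2 < m
  · rw [pvVGet_set_other hsh hc1 hc2 hc3 hc4 hnl hb.1 hb.2.2.1 (by omega)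
      (fun hh => hne ⟨hh.1, hh.2.1⟩)]
  · rw [if_neg (by tauto), if_neg (by tauto)]

theorem pvFoldl_expand (g : List (List Char)) (n m : Int) (y x lv t : Int)
    (hlv : lv = 0 ∨ lv = 1) :
    ∀ (ds : List (Int × Int)) (rest : List (Int × Int × Int × Int))
      (v : List (List (List Bool))), pvVShape v n m → ds.Pairwise (· ≠ ·) →
      ds.foldl (pvExpand g n m y x lv t) (rest, v) =
        (rest ++ ds.filterMap (pvAppF g n m v y x lv t),
         pvDoMarks v (ds.filterMap (pvAppF g n m v y x lv t))) := by
  intro ds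
  induction ds with
  | nil => intro rest v _ _; simp [pvDoMarks]
  | cons d ds ih =>
    intro rest v hsh hpw
    rw [List.foldl_cons]
    rcases hF : pvAppF g n m v y x lv t d with _ | a
    · have hng : ¬(0 ≤ y + d.1 ∧ y + d.1 < n ∧ 0 ≤ x + d.2 ∧ x + d.2 < m ∧
          pvVGet v (y + d.1) (x + d.2) lv = false ∧ pvAt g (y + d.1) (x + d.2) ≠ 'X') := by
        intro hgd
        simp only [pvAppF] at hF
        rw [if_pos hgd] at hF
        simp at hF
      have hexp : pvExpand g n m y x lv t (rest, v) d = (rest, v) := by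
        simp only [pvExpand]
        rw [if_neg hng]
      rw [hexp, ih rest v hsh hpw.of_cons]
      simp [hF]
    · obtain ⟨ha, hb1, hb2, hb3, hb4, hb5, hb6⟩ := pvAppF_cell hF
      set nl : Int := if pvAt g (y + d.1) (x + d.2) = 'L' then 1 else lv with hnl
      have hexp : pvExpand g n m y x lv t (rest, v) d =
          (rest ++ [a], pvVSet v (y + d.1) (x + d.2) nl) := by
        simp only [pvExpand]
        rw [if_pos ⟨hb1, hb2, hb3, hb4, hb5, hb6⟩, ha]
      have hnl01 : nl = 0 ∨ nl = 1 := by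
        rw [hnl]; split
        · exact Or.inr rfl
        · exact hlv
      have hsh2 := pvVShape_set hsh hb1 hb2 hb3 hb4 hnl01
      have hgv : ds.filterMap (pvAppF g n m (pvVSet v (y + d.1) (x + d.2) nl) y x lv t) =
          ds.filterMap (pvAppF g n m v y x lv t) := by
        apply List.filterMap_congr
        intro d' hd'
        have hdd : d' ≠ d := by
          intro hh
          subst hh
          exact (List.rel_of_pairwise_cons hpw hd') rfl
        apply pvAppF_congr_at hsh hb1 hb2 hb3 hb4 hnl01 hlv
        intro hh
        apply hdd
        obtain ⟨e1, e2⟩ := hh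
        exact Prod.ext (by omega) (by omega)
      rw [hexp, ih (rest ++ [a]) _ hsh2 hpw.of_cons, hgv]
      simp only [Prod.mk.injEq]
      constructor
      · rw [List.filterMap_cons_some hF, List.append_assoc]
        rfl
      · rw [List.filterMap_cons_some hF]
        have : pvDoMarks v (a :: ds.filterMap (pvAppF g n m v y x lv t)) =
            pvDoMarks (pvVSet v a.1 a.2.1 a.2.2.1) (ds.filterMap (pvAppF g n m v y x lv t)) := rfl
        rw [this, ha]

-- ===== A-side: facts about the appended entries =====

theorem pvDirs_nbrs {y x : Int} {d : Int × Int} (hd : d ∈ pvDirs) :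
    (y + d.1, x + d.2) ∈ pvNbrs y x := by
  simp only [pvDirs, List.mem_cons, List.not_mem_nil, or_false] at hd
  rcases hd with rfl | rfl | rfl | rfl <;> simp only [pvNbrs, List.mem_cons] <;>
    norm_num [Prod.ext_iff] <;> omega

theorem pvNbrs_dirs {y x : Int} {c : Int × Int} (hc : c ∈ pvNbrs y x) :
    ∃ d ∈ pvDirs, (y + d.1, x + d.2) = c := by
  simp only [pvNbrs, List.mem_cons, List.not_mem_nil, or_false] at hc
  rcases hc with rfl | rfl | rfl | rfl
  · exact ⟨(-1, 0), by simp [pvDirs], by norm_num [Prod.ext_iff]; omega⟩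
  · exact ⟨(1, 0), by simp [pvDirs], by norm_num [Prod.ext_iff]⟩
  · exact ⟨(0, -1), by simp [pvDirs], by norm_num [Prod.ext_iff]; omega⟩
  · exact ⟨(0, 1), by simp [pvDirs], by norm_num [Prod.ext_iff]⟩

theorem pvAppends_mem_facts {g : List (List Char)} {n m : Int}
    {v : List (List (List Bool))} {y x lv t : Int} {a : Int × Int × Int × Int}
    (h : a ∈ pvAppends g n m v y x lv t) :
    0 ≤ a.1 ∧ a.1 < n ∧ 0 ≤ a.2.1 ∧ a.2.1 < m ∧ pvAt g a.1 a.2.1 ≠ 'X' ∧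
    a.2.2.1 = (if pvAt g a.1 a.2.1 = 'L' then 1 else lv) ∧ a.2.2.2 = t + 1 ∧
    pvVGet v a.1 a.2.1 lv = false ∧ (a.1, a.2.1) ∈ pvNbrs y x := by
  rw [pvAppends_eq_filterMap] at h
  obtain ⟨d, hd, hF⟩ := List.mem_filterMap.mp h
  obtain ⟨ha, hb1, hb2, hb3, hb4, hb5, hb6⟩ := pvAppF_cell hF
  subst ha
  exact ⟨hb1, hb2, hb3, hb4, hb6, rfl, rfl, hb5, pvDirs_nbrs hd⟩

theorem pvAppends_complete {g : List (List Char)} {n m : Int}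
    {v : List (List (List Bool))} {y x lv t : Int} {σ : Int × Int × Int}
    (hσ : pvStep g n m (y, x, lv) σ) (hunm : pvVGet v σ.1 σ.2.1 lv = false) :
    ∃ a ∈ pvAppends g n m v y x lv t, (a.1, a.2.1, a.2.2.1) = σ := by
  obtain ⟨hnb, hb1, hb2, hb3, hb4, hbx, hlvf⟩ := hσ
  obtain ⟨d, hd, hcell⟩ := pvNbrs_dirs hnb
  simp only [Prod.ext_iff] at hcell
  refine ⟨(y + d.1, x + d.2, (if pvAt g (y + d.1) (x + d.2) = 'L' then 1 else lv), t + 1), ?_, ?_⟩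
  · rw [pvAppends_eq_filterMap]
    apply List.mem_filterMap.mpr
    refine ⟨d, hd, ?_⟩
    simp only [pvAppF]
    rw [if_pos]
    refine ⟨by rw [hcell.1]; exact hb1, by rw [hcell.1]; exact hb2,
      by rw [hcell.2]; exact hb3, by rw [hcell.2]; exact hb4, ?_, ?_⟩
    · rw [hcell.1, hcell.2]; exact hunm
    · rw [hcell.1, hcell.2]; exact hbx
  · simp only [Prod.ext_iff]
    exact ⟨hcell.1, hcell.2, by rw [hcell.1, hcell.2, ← hlvf]⟩

theorem pvAppends_pairwise (g : List (List Char)) (n m : Int)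
    (v : List (List (List Bool))) (y x lv t : Int) :
    (pvAppends g n m v y x lv t).Pairwise (fun a b => (a.1, a.2.1) ≠ (b.1, b.2.1)) := by
  rw [pvAppends_eq_filterMap]
  refine List.Pairwise.filterMap _ ?_ (by decide : pvDirs.Pairwise (· ≠ ·))
  intro d d' hne a ha a' ha'
  obtain ⟨he, _⟩ := pvAppF_cell ha
  obtain ⟨he', _⟩ := pvAppF_cell ha'
  subst he he'
  intro h1
  rw [Prod.ext_iff] at h1
  simp only at h1
  exact absurd (Prod.ext (by omega) (by omega)) hne

theorem pvAppends_length_le (g : List (List Char)) (n m : Int)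
    (v : List (List (List Bool))) (y x lv t : Int) :
    (pvAppends g n m v y x lv t).length ≤ 4 :=
  List.length_filterMap_le _ _

-- ===== A-side: the loop potential =====

def pvU (v : List (List (List Bool))) (n m b : Int) : Nat :=
  (pvCells n m).countP (fun c => !(pvVGet v c.1 c.2 b))

def pvPhi (q : List (Int × Int × Int × Int)) (v : List (List (List Bool))) (n m : Int) : Nat :=
  q.length + 4 * q.countP (fun e => e.2.2.1 == 0) + 5 * pvU v n m 0 + 2 * pvU v n m 1

theorem length_pvCells (n m : Int) : (pvCells n m).length = n.toNat * m.toNat := by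
  rw [pvCells, List.length_flatMap]
  have h : ∀ i ∈ PySem.List.pyRange 0 n 1,
      ((PySem.List.pyRange 0 m 1).map (fun j => ((i, j) : Int × Int))).length = m.toNat := by
    intro i _
    rw [List.length_map, PySem.List.length_pyRange_one]
    norm_num
  rw [List.map_congr_left h, List.map_const', List.sum_replicate, smul_eq_mul,
    PySem.List.length_pyRange_one]
  norm_num

theorem pvU_le (v : List (List (List Bool))) (n m b : Int) :
    pvU v n m b ≤ n.toNat * m.toNat := by
  rw [pvU, ← length_pvCells n m]
  exact List.countP_le_length

theorem pvU_set_eq {v : List (List (List Bool))} {n m : Int} (hsh : pvVShape v n m)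
    {y x l b : Int} (hy : 0 ≤ y) (hyn : y < n) (hx : 0 ≤ x) (hxm : x < m)
    (hl : l = 0 ∨ l = 1) (hb : b = 0 ∨ b = 1) :
    pvU v n m b = pvU (pvVSet v y x l) n m b +
      (if b = l ∧ pvVGet v y x b = false then 1 else 0) := by
  have hmem : ((y, x) : Int × Int) ∈ pvCells n m := mem_pvCells.mpr ⟨hy, hyn, hx, hxm⟩
  have hperm := List.perm_cons_erase hmem
  have hnd := nodup_pvCells n m
  have hcongr : ∀ c ∈ (pvCells n m).erase (y, x),
      (!(pvVGet (pvVSet v y x l) c.1 c.2 b)) = (!(pvVGet v c.1 c.2 b)) := by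
    intro c hc
    have hcne : c ≠ (y, x) := (List.Nodup.mem_erase_iff hnd).mp hc |>.1
    have hcmem : c ∈ pvCells n m := (List.Nodup.mem_erase_iff hnd).mp hc |>.2
    obtain ⟨hc1, hc2, hc3, hc4⟩ := mem_pvCells.mp hcmem
    rw [pvVGet_set_other hsh hy hyn hx hxm hl hc1 hc3 (by omega)
      (fun hh => hcne (Prod.ext hh.1 hh.2.1))]
  rw [pvU, pvU, List.Perm.countP_congr hperm (fun _ _ => rfl),
    List.Perm.countP_congr hperm (fun _ _ => rfl), List.countP_cons, List.countP_cons,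
    List.Perm.countP_congr (List.Perm.refl _) hcongr]
  by_cases hbl : b = l
  · subst hbl
    rw [pvVGet_set_self hsh hy hyn hx hxm hl]
    by_cases hget : pvVGet v y x b = false
    · rw [hget]
      simp
    · simp only [Bool.not_eq_false] at hget
      rw [hget]
      simp
  · rw [pvVGet_set_other hsh hy hyn hx hxm hl hy hx (by omega)
      (fun hh => hbl hh.2.2)]
    simp [hbl]

theorem pvU_marks_bound {n m : Int} {lv : Int}
    (hlv : lv = 0 ∨ lv = 1) :
    ∀ (A : List (Int × Int × Int × Int)) (v : List (List (List Bool))),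
      pvVShape v n m →
      (∀ a ∈ A, 0 ≤ a.1 ∧ a.1 < n ∧ 0 ≤ a.2.1 ∧ a.2.1 < m ∧
        (a.2.2.1 = 0 ∨ a.2.2.1 = 1) ∧ (a.2.2.1 = lv ∨ (a.2.2.1 = 1 ∧ lv = 0)) ∧
        pvVGet v a.1 a.2.1 lv = false) →
      A.Pairwise (fun a b => (a.1, a.2.1) ≠ (b.1, b.2.1)) →
      5 * pvU (pvDoMarks v A) n m 0 + 2 * pvU (pvDoMarks v A) n m 1 +
        (if lv = 0 then 5 * A.countP (fun a => a.2.2.1 == 0) else 2 * A.length)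
        ≤ 5 * pvU v n m 0 + 2 * pvU v n m 1 := by
  intro A
  induction A with
  | nil =>
    intro v _ _ _
    simp [pvDoMarks]
  | cons a A ih =>
    intro v hsh hA hpw
    obtain ⟨h1, h2, h3, h4, h5, h6, h7⟩ := hA a (by simp)
    have hsh2 := pvVShape_set hsh h1 h2 h3 h4 h5
    have hA2 : ∀ a' ∈ A, 0 ≤ a'.1 ∧ a'.1 < n ∧ 0 ≤ a'.2.1 ∧ a'.2.1 < m ∧
        (a'.2.2.1 = 0 ∨ a'.2.2.1 = 1) ∧ (a'.2.2.1 = lv ∨ (a'.2.2.1 = 1 ∧ lv = 0)) ∧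
        pvVGet (pvVSet v a.1 a.2.1 a.2.2.1) a'.1 a'.2.1 lv = false := by
      intro a' ha'
      obtain ⟨g1, g2, g3, g4, g5, g6, g7⟩ := hA a' (by simp [ha'])
      have hcne : (a'.1, a'.2.1) ≠ (a.1, a.2.1) :=
        fun hh => (List.rel_of_pairwise_cons hpw ha') hh.symm
      refine ⟨g1, g2, g3, g4, g5, g6, ?_⟩
      rw [pvVGet_set_other hsh h1 h2 h3 h4 h5 g1 g3 (by omega)
        (fun hh => hcne (by simp only [Prod.ext_iff]; exact ⟨hh.1, hh.2.1⟩))]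
      exact g7
    have hih := ih (pvVSet v a.1 a.2.1 a.2.2.1) hsh2 hA2 hpw.of_cons
    have hu0 := pvU_set_eq hsh h1 h2 h3 h4 h5 (Or.inl rfl) (y := a.1) (x := a.2.1) (l := a.2.2.1)
    have hu1 := pvU_set_eq hsh h1 h2 h3 h4 h5 (Or.inr rfl) (y := a.1) (x := a.2.1) (l := a.2.2.1)
    have hfold : pvDoMarks v (a :: A) = pvDoMarks (pvVSet v a.1 a.2.1 a.2.2.1) A := rfl
    rw [hfold, List.countP_cons, List.length_cons]
    rcases hlv with rfl | rfl
    · -- lv = 0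
      rcases h6 with h6 | ⟨h6, _⟩
      · -- nl = 0 : fresh mark at level 0
        rw [if_pos (⟨h6.symm, h7⟩ : (0 : Int) = a.2.2.1 ∧ pvVGet v a.1 a.2.1 0 = false)] at hu0
        rw [if_neg (by simp [h6])] at hu1
        rw [if_pos rfl] at hih ⊢
        have hc : ((a.2.2.1 == (0 : Int)) : Bool) = true := by simp [h6]
        rw [hc]
        simp only [if_true]
        omega
      · -- nl = 1, lv = 0 : mark at level 1, may or may not be fresh
        rw [if_neg (by simp [h6])] at hu0
        have hle1 : pvU (pvVSet v a.1 a.2.1 a.2.2.1) n m 1 ≤ pvU v n m 1 := by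
          rw [hu1]; split <;> omega
        rw [if_pos rfl] at hih ⊢
        have hc : ((a.2.2.1 == (0 : Int)) : Bool) = false := by simp [h6]
        rw [hc]
        simp only [Bool.false_eq_true, if_false]
        omega
    · -- lv = 1 : nl = 1, fresh mark at level 1
      have h6' : a.2.2.1 = 1 := by rcases h6 with h6 | ⟨_, h6⟩ <;> omega
      rw [if_neg (by simp [h6'])] at hu0
      rw [if_pos (⟨h6'.symm, h7⟩ : (1 : Int) = a.2.2.1 ∧ pvVGet v a.1 a.2.1 1 = false)] at hu1
      rw [if_neg (by norm_num)] at hih ⊢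
      omega

-- ===== A-side: the loop invariant =====

def pvStq (e : Int × Int × Int × Int) : Int × Int × Int := (e.1, e.2.1, e.2.2.1)

def pvEndOK (g : List (List Char)) (n m endy endx : Int) : Prop :=
  pvEnd g n m = some (endy, endx) ∨ (pvEnd g n m = none ∧ endy = -1 ∧ endx = -1)

theorem mem_pvSrcCells {g : List (List Char)} {n m : Int} {c : Int × Int} :
    c ∈ pvSrcCells g n m ↔ 0 ≤ c.1 ∧ c.1 < n ∧ 0 ≤ c.2 ∧ c.2 < m ∧ pvAt g c.1 c.2 = 'S' := by
  rw [pvSrcCells, List.mem_filter, mem_pvCells]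
  simp only [decide_eq_true_eq]
  tauto

theorem pvEnd_facts {g : List (List Char)} {n m : Int} {c : Int × Int}
    (h : pvEnd g n m = some c) :
    0 ≤ c.1 ∧ c.1 < n ∧ 0 ≤ c.2 ∧ c.2 < m ∧ pvAt g c.1 c.2 = 'E' := by
  have hmem := List.mem_of_getLast? h
  rw [List.mem_filter, mem_pvCells] at hmem
  simp only [decide_eq_true_eq] at hmem
  tauto

structure pvAInv (g : List (List Char)) (n m : Int)
    (qa qb : List (Int × Int × Int × Int)) (v : List (List (List Bool))) (t : Nat) :
    Prop where
  shape : pvVShape v n m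
  wf : ∀ e ∈ qa ++ qb, 0 ≤ e.1 ∧ e.1 < n ∧ 0 ≤ e.2.1 ∧ e.2.1 < m ∧
        (e.2.2.1 = 0 ∨ e.2.2.1 = 1) ∧ pvAt g e.1 e.2.1 ≠ 'X' ∧
        (pvAt g e.1 e.2.1 = 'L' → e.2.2.1 = 1)
  ta : ∀ e ∈ qa, e.2.2.2 = (t : Int)
  tb : ∀ e ∈ qb, e.2.2.2 = (t : Int) + 1
  ra : ∀ e ∈ qa, pvReach g n m t (pvStq e)
  rb : ∀ e ∈ qb, pvReach g n m (t + 1) (pvStq e)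
  gen : ∀ e ∈ qa ++ qb, pvAt g e.1 e.2.1 = 'L' ∨
        ∃ dn : Nat, (dn : Int) = e.2.2.2 ∧ pvDistEq g n m (pvStq e) dn
  ml : ∀ σ, pvReach g n m t σ → pvMarked v σ
  mr : ∀ σ, pvMarked v σ → pvReach g n m (t + 1) σ
  nl0 : ∀ c : Int × Int, pvAt g c.1 c.2 = 'L' → ¬ pvMarked v (c.1, c.2, 0)
  fr : ∀ σ, ¬ pvMarked v σ → pvDistEq g n m σ (t + 1) →
        ∃ e ∈ qa, pvDistEq g n m (pvStq e) t ∧ pvStep g n m (pvStq e) σ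
  pb : ∀ σ, pvMarked v σ → pvDistEq g n m σ (t + 1) → ∃ e ∈ qb, pvStq e = σ
  eqq : ∀ c : Int × Int, pvEnd g n m = some c → pvMarked v (c.1, c.2, 1) →
        ∃ e ∈ qa ++ qb, pvStq e = (c.1, c.2, 1)
  ls : ∀ σ : Int × Int × Int, pvAt g σ.1 σ.2.1 = 'L' → σ.2.2 = 1 → pvMarked v σ →
        (∃ e ∈ qa ++ qb, pvStq e = σ) ∨ (∀ σ', pvStep g n m σ σ' → pvMarked v σ')
  dup : ∀ l e r, qa ++ qb = l ++ e :: r → pvAt g e.1 e.2.1 = 'L' →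
        (∃ dn : Nat, (dn : Int) = e.2.2.2 ∧ pvDistEq g n m (pvStq e) dn) ∨
        (∃ e' ∈ l, pvStq e' = pvStq e) ∨
        (∀ σ', pvStep g n m (pvStq e) σ' → pvMarked v σ')

-- when the current level is exhausted, the next level becomes current
theorem pvAInv_shift {g : List (List Char)} {n m : Int}
    {qb : List (Int × Int × Int × Int)} {v : List (List (List Bool))} {t : Nat}
    (h : pvAInv g n m [] qb v t) : pvAInv g n m qb [] v (t + 1) := by
  have hml' : ∀ σ, pvReach g n m (t + 1) σ → pvMarked v σ := by
    intro σ hr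
    obtain ⟨d, hd⟩ := pvDistEq_exists ⟨t + 1, hr⟩
    have hdle : d ≤ t + 1 := hd.2 _ hr
    rcases Nat.lt_or_ge d (t + 1) with hlt | hge
    · exact h.ml σ (pvReach_mono g n m (by omega) hd.1)
    · have : d = t + 1 := by omega
      subst this
      by_contra hunm
      obtain ⟨e, he, _⟩ := h.fr σ hunm hd
      simp at he
  refine ⟨h.shape, ?_, ?_, ?_, ?_, ?_, ?_, hml', ?_, h.nl0, ?_, ?_, ?_, ?_, ?_⟩
  · intro e he; exact h.wf e (by simpa using he)
  · intro e he
    have := h.tb e (by simpa using he)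
    push_cast
    omega
  · intro e he; simp at he
  · intro e he; exact h.rb e (by simpa using he)
  · intro e he; simp at he
  · intro e he
    rcases h.gen e (by simpa using he) with hL | hgen
    · exact Or.inl hL
    · exact Or.inr hgen
  · intro σ hm
    exact pvReach_mono g n m (by omega) (h.mr σ hm)
  · -- frontier at t+2
    intro σ hunm hd
    obtain ⟨ρ, hρ, hs⟩ := pvDistEq_pred hd
    have hmρ : pvMarked v ρ := hml' ρ hρ.1
    obtain ⟨e, he, hst⟩ := h.pb ρ hmρ hρ
    exact ⟨e, he, hst ▸ hρ, hst ▸ hs⟩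
  · -- nothing at distance t+2 is marked
    intro σ hm hd
    have hr := h.mr σ hm
    have := hd.2 _ hr
    omega
  · intro c hc hm
    obtain ⟨e, he, hst⟩ := h.eqq c hc hm
    exact ⟨e, by simpa using List.mem_append.mp he, hst⟩
  · intro σ hL h1 hm
    rcases h.ls σ hL h1 hm with ⟨e, he, hst⟩ | hall
    · exact Or.inl ⟨e, by simpa using List.mem_append.mp he, hst⟩
    · exact Or.inr hall
  · intro l e r hdec hL
    rcases h.dup l e r (by simpa using hdec) hL with hg | hd | hd
    · exact Or.inl hg
    · exact Or.inr (Or.inl hd)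
    · exact Or.inr (Or.inr hd)

-- an exhausted queue answers -1 correctly
theorem pvEmpty_case {g : List (List Char)} {n m : Int}
    {v : List (List (List Bool))} {t : Nat} (h : pvAInv g n m [] [] v t) :
    pvAnsSpec g n m (-1) := by
  have hble : ∀ σ (dn : Nat), pvDistEq g n m σ dn → dn ≤ t + 1 := by
    intro σ dn hd
    by_contra hgt
    obtain ⟨σ', hσ'⟩ := pvDistEq_chain hd (t + 2) (by omega)
    obtain ⟨ρ, hρ, hs⟩ := pvDistEq_pred hσ'
    have hmρ : pvMarked v ρ := by
      rcases Nat.lt_or_ge (t + 1) (t + 1) with h' | _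
      · omega
      · by_contra hunm
        obtain ⟨e, he, _⟩ := h.fr ρ hunm hρ
        simp at he
    obtain ⟨e, he, _⟩ := h.pb ρ hmρ hρ
    simp at he
  have hmk : ∀ σ (dn : Nat), pvDistEq g n m σ dn → pvMarked v σ := by
    intro σ dn hd
    have := hble σ dn hd
    rcases Nat.lt_or_ge dn (t + 1) with hlt | hge
    · exact h.ml σ (pvReach_mono g n m (by omega) hd.1)
    · have : dn = t + 1 := by omega
      subst this
      by_contra hunm
      obtain ⟨e, he, _⟩ := h.fr σ hunm hd
      simp at he
  constructor
  · intro _; rfl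
  · intro c hc
    constructor
    · intro d hd
      exfalso
      obtain ⟨e, he, _⟩ := h.eqq c hc (hmk _ d hd)
      simp at he
    · intro _; rfl

theorem pvDistEq_succ_of {g : List (List Char)} {n m : Int} {t : Nat} {σ : Int × Int × Int}
    (hr : pvReach g n m (t + 1) σ) (hnr : ¬ pvReach g n m t σ) :
    pvDistEq g n m σ (t + 1) := by
  refine ⟨hr, ?_⟩
  intro k hk
  by_contra hlt
  exact hnr (pvReach_mono g n m (by omega) hk)

theorem pvNbr_ne {y x : Int} {c : Int × Int} (hc : c ∈ pvNbrs y x) : c ≠ (y, x) := by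
  simp only [pvNbrs, List.mem_cons, List.not_mem_nil, or_false] at hc
  rcases hc with rfl | rfl | rfl | rfl <;>
    (intro hh; rw [Prod.ext_iff] at hh; simp only at hh; omega)

theorem pvMarked_not_iff {v : List (List (List Bool))} {σ : Int × Int × Int}
    (h1 : 0 ≤ σ.1) (h2 : 0 ≤ σ.2.1) (h3 : 0 ≤ σ.2.2) :
    ¬ pvMarked v σ ↔ pvVGet v σ.1 σ.2.1 σ.2.2 = false := by
  rw [pvMarked]
  constructor
  · intro h
    rcases hb : pvVGet v σ.1 σ.2.1 σ.2.2 with _ | _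
    · rfl
    · exact absurd ⟨h1, h2, h3, hb⟩ h
  · intro hb hh
    rw [hh.2.2.2] at hb
    exact Bool.noConfusion hb

-- popping a genuine entry (its time is its state's distance) re-establishes the invariant
theorem pvAInv_pop {g : List (List Char)} {n m : Int} {y x lv : Int}
    {qa' qb : List (Int × Int × Int × Int)} {v : List (List (List Bool))} {t : Nat}
    (hInv : pvAInv g n m ((y, x, lv, (t : Int)) :: qa') qb v t)
    (hgen : pvDistEq g n m (y, x, lv) t)
    (hnoret : ∀ c : Int × Int, pvEnd g n m = some c → ¬((y, x) = c ∧ lv = 1)) :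
    pvAInv g n m qa' (qb ++ pvAppends g n m v y x lv (t : Int))
      (pvDoMarks v (pvAppends g n m v y x lv (t : Int))) t := by
  classical
  set A := pvAppends g n m v y x lv (t : Int) with hA
  set v' := pvDoMarks v A with hv'
  obtain ⟨hw1, hw2, hw3, hw4, hw5, hw6, hw7⟩ :=
    hInv.wf (y, x, lv, (t : Int)) (by simp)
  simp only at hw1 hw2 hw3 hw4 hw5 hw6 hw7
  have hAin : ∀ a ∈ A, 0 ≤ a.1 ∧ a.1 < n ∧ 0 ≤ a.2.1 ∧ a.2.1 < m ∧
      (a.2.2.1 = 0 ∨ a.2.2.1 = 1) := by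
    intro a ha
    obtain ⟨f1, f2, f3, f4, _, f6, _⟩ := pvAppends_mem_facts ha
    refine ⟨f1, f2, f3, f4, ?_⟩
    rw [f6]; split
    · exact Or.inr rfl
    · exact hw5
  have hmk : ∀ σ, pvMarked v' σ ↔ pvMarked v σ ∨ ∃ a ∈ A, pvStq a = σ :=
    pvMarked_doMarks A hInv.shape hAin
  have hstepA : ∀ a ∈ A, pvStep g n m (y, x, lv) (pvStq a) := by
    intro a ha
    obtain ⟨f1, f2, f3, f4, f5, f6, _, _, f9⟩ := pvAppends_mem_facts ha
    exact ⟨f9, f1, f2, f3, f4, f5, f6⟩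
  have hreachA : ∀ a ∈ A, pvReach g n m (t + 1) (pvStq a) := by
    intro a ha
    exact pvStep_reach_succ hgen.1 (hstepA a ha)
  have hw5' : (0 : Int) ≤ lv := by rcases hw5 with rfl | rfl <;> norm_num
  have hclose : ∀ σ', pvStep g n m (y, x, lv) σ' → pvMarked v' σ' := by
    intro σ' hs
    by_cases hm : pvMarked v σ'
    · exact (hmk σ').mpr (Or.inl hm)
    · obtain ⟨hnb, g1, g2, g3, g4, g5, g6⟩ := hs
      have hlv' : (0 : Int) ≤ σ'.2.2 := by
        rw [g6]; split
        · norm_num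
        · simpa using hw5'
      have hunm : pvVGet v σ'.1 σ'.2.1 lv = false := by
        by_cases hLc : pvAt g σ'.1 σ'.2.1 = 'L'
        · rcases hw5 with hlv0 | hlv1
          · -- lv = 0: the (·,·,0) slot of an 'L' cell is never marked
            have hnl' : ¬ pvMarked v (σ'.1, σ'.2.1, (0 : Int)) :=
              hInv.nl0 (σ'.1, σ'.2.1) hLc
            rw [pvMarked_not_iff (σ := (σ'.1, σ'.2.1, 0)) (by exact g1) (by exact g3)
              (by norm_num)] at hnl'
            rw [hlv0]
            exact hnl'
          · have hσlv : σ'.2.2 = lv := by rw [g6, hlv1, if_pos hLc]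
            rw [← hσlv]
            exact (pvMarked_not_iff g1 g3 hlv').mp hm
        · have hσlv : σ'.2.2 = lv := by rw [g6, if_neg hLc]
          rw [← hσlv]
          exact (pvMarked_not_iff g1 g3 hlv').mp hm
      obtain ⟨a, ha, hsta⟩ :=
        pvAppends_complete (⟨hnb, g1, g2, g3, g4, g5, g6⟩ :
          pvStep g n m (y, x, lv) σ') hunm
      exact (hmk σ').mpr (Or.inr ⟨a, ha, hsta⟩)
  have hAgenuine : ∀ a ∈ A, ¬ pvMarked v (pvStq a) →
      pvDistEq g n m (pvStq a) (t + 1) := by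
    intro a ha hunm
    refine pvDistEq_succ_of (hreachA a ha) ?_
    intro hr
    exact hunm (hInv.ml _ hr)
  have hAtime : ∀ a ∈ A, a.2.2.2 = (t : Int) + 1 := by
    intro a ha
    exact (pvAppends_mem_facts ha).2.2.2.2.2.2.1
  refine ⟨pvVShape_doMarks A hInv.shape hAin, ?_, ?_, ?_, ?_, ?_, ?_, ?_, ?_, ?_, ?_, ?_,
    ?_, ?_, ?_⟩
  · -- wf
    intro e he
    rcases List.mem_append.mp he with he | he
    · exact hInv.wf e (by simp [he])
    · rcases List.mem_append.mp he with he | he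
      · exact hInv.wf e (by simp [he])
      · obtain ⟨f1, f2, f3, f4, f5, f6, _, _, _⟩ := pvAppends_mem_facts he
        refine ⟨f1, f2, f3, f4, ?_, f5, ?_⟩
        · rw [f6]; split
          · exact Or.inr rfl
          · exact hw5
        · intro hL; rw [f6, if_pos hL]
  · -- ta
    intro e he; exact hInv.ta e (by simp [he])
  · -- tb
    intro e he
    rcases List.mem_append.mp he with he | he
    · exact hInv.tb e he
    · exact hAtime e he
  · -- ra
    intro e he; exact hInv.ra e (by simp [he])
  · -- rb
    intro e he
    rcases List.mem_append.mp he with he | he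
    · exact hInv.rb e he
    · exact hreachA e he
  · -- gen
    intro e he
    rcases List.mem_append.mp he with he | he
    · exact hInv.gen e (by simp [he])
    · rcases List.mem_append.mp he with he | he
      · exact hInv.gen e (by simp [he])
      · by_cases hLc : pvAt g e.1 e.2.1 = 'L'
        · exact Or.inl hLc
        · refine Or.inr ⟨t + 1, by rw [hAtime e he]; push_cast; ring, ?_⟩
          apply hAgenuine e he
          obtain ⟨f1, f2, f3, f4, _, f6, _, f8, _⟩ := pvAppends_mem_facts he
          have hst : pvStq e = (e.1, e.2.1, lv) := by
            rw [pvStq, f6, if_neg hLc]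
          rw [hst, pvMarked_not_iff f1 f3 (by simpa using hw5')]
          exact f8
  · -- ml
    intro σ hr
    exact (hmk σ).mpr (Or.inl (hInv.ml σ hr))
  · -- mr
    intro σ hm
    rcases (hmk σ).mp hm with hm | ⟨a, ha, rfl⟩
    · exact hInv.mr σ hm
    · exact hreachA a ha
  · -- nl0
    intro c hLc hm
    rcases (hmk _).mp hm with hm | ⟨a, ha, hst⟩
    · exact hInv.nl0 c hLc hm
    · obtain ⟨_, _, _, _, _, f6, _, _, _⟩ := pvAppends_mem_facts ha
      rw [pvStq, Prod.ext_iff] at hst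
      obtain ⟨hc1, hst2⟩ := hst
      rw [Prod.ext_iff] at hst2
      obtain ⟨hc2, hc3⟩ := hst2
      simp only at hc1 hc2 hc3
      rw [f6, hc1, hc2, if_pos hLc] at hc3
      exact absurd hc3 (by norm_num)
  · -- fr
    intro σ hunm hd
    have hunmv : ¬ pvMarked v σ := fun hm => hunm ((hmk σ).mpr (Or.inl hm))
    obtain ⟨e, he, hde, hse⟩ := hInv.fr σ hunmv hd
    rcases List.mem_cons.mp he with rfl | he
    · exact absurd (hclose σ hse) hunm
    · exact ⟨e, he, hde, hse⟩
  · -- pb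
    intro σ hm hd
    rcases (hmk σ).mp hm with hm | ⟨a, ha, hst⟩
    · obtain ⟨e, he, hst⟩ := hInv.pb σ hm hd
      exact ⟨e, by simp [he], hst⟩
    · exact ⟨a, by simp [ha], hst⟩
  · -- eqq
    intro c hc hm
    rcases (hmk _).mp hm with hm | ⟨a, ha, hst⟩
    · obtain ⟨e, he, hst⟩ := hInv.eqq c hc hm
      rcases List.mem_append.mp he with he | he
      · rcases List.mem_cons.mp he with rfl | he
        · exfalso
          apply hnoret c hc
          rw [pvStq, Prod.ext_iff] at hst
          obtain ⟨hc1, hst2⟩ := hst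
          rw [Prod.ext_iff] at hst2
          obtain ⟨hc2, hc3⟩ := hst2
          simp only at hc1 hc2 hc3
          exact ⟨Prod.ext hc1 hc2, hc3⟩
        · exact ⟨e, by simp [he], hst⟩
      · exact ⟨e, by simp [he], hst⟩
    · exact ⟨a, by simp [ha], hst⟩
  · -- ls
    intro σ hLσ hσ1 hm
    rcases (hmk σ).mp hm with hmv | ⟨a, ha, hst⟩
    · rcases hInv.ls σ hLσ hσ1 hmv with ⟨e, he, hst⟩ | hall
      · rcases List.mem_append.mp he with he | he
        · rcases List.mem_cons.mp he with rfl | he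
          · refine Or.inr ?_
            have hsth : pvStq (y, x, lv, (t : Int)) = (y, x, lv) := rfl
            rw [hsth] at hst
            intro σ' hs'
            exact hclose σ' (hst ▸ hs')
          · exact Or.inl ⟨e, by simp [he], hst⟩
        · exact Or.inl ⟨e, by simp [he], hst⟩
      · exact Or.inr (fun σ' hs' => (hmk σ').mpr (Or.inl (hall σ' hs')))
    · exact Or.inl ⟨a, by simp [ha], hst⟩
  · -- dup
    intro l f r hdec hLf
    have hdec' : (qa' ++ qb) ++ A = l ++ f :: r := by
      rw [← hdec, List.append_assoc]
    have hInA : f ∈ A → (∃ e' ∈ qa' ++ qb, pvStq e' = pvStq f) ∨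
        (∃ dn : Nat, (dn : Int) = f.2.2.2 ∧ pvDistEq g n m (pvStq f) dn) ∨
        (∀ σ', pvStep g n m (pvStq f) σ' → pvMarked v' σ') := by
      intro hfA
      by_cases hmf : pvMarked v (pvStq f)
      · have hLf' : pvAt g (pvStq f).1 (pvStq f).2.1 = 'L' := hLf
        have hf1 : (pvStq f).2.2 = 1 := by
          have f6 := (pvAppends_mem_facts hfA).2.2.2.2.2.1
          rw [pvStq]
          simp only
          rw [f6, if_pos hLf]
        rcases hInv.ls (pvStq f) hLf' hf1 hmf with ⟨e, he, hst⟩ | hall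
        · rcases List.mem_append.mp he with he | he
          · rcases List.mem_cons.mp he with rfl | he
            · exfalso
              have hnbr := (pvAppends_mem_facts hfA).2.2.2.2.2.2.2.2
              have hne := pvNbr_ne hnbr
              apply hne
              have : pvStq (y, x, lv, (t : Int)) = pvStq f := hst
              rw [pvStq, pvStq, Prod.ext_iff] at this
              obtain ⟨e1, this2⟩ := this
              rw [Prod.ext_iff] at this2
              simp only at e1 this2
              exact Prod.ext e1.symm this2.1.symm
            · exact Or.inl ⟨e, by simp [he], hst⟩
          · exact Or.inl ⟨e, by simp [he], hst⟩
        · exact Or.inr (Or.inr (fun σ' hs' => (hmk σ').mpr (Or.inl (hall σ' hs'))))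
      · exact Or.inr (Or.inl ⟨t + 1, by rw [hAtime f hfA]; push_cast; ring,
          hAgenuine f hfA hmf⟩)
    rcases List.append_eq_append_iff.mp hdec' with ⟨l', hl1, hl2⟩ | ⟨w, hw1, hw2⟩
    · -- f lies in the appended part
      have hfA : f ∈ A := by rw [hl2]; simp
      rcases hInA hfA with ⟨e', he', hst⟩ | hg | hall
      · refine Or.inr (Or.inl ⟨e', ?_, hst⟩)
        rw [hl1]
        exact List.mem_append_left _ he'
      · exact Or.inl hg
      · exact Or.inr (Or.inr hall)
    · -- f lies in the remaining old queue, or w = [] and f again heads the appends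
      rcases w with _ | ⟨f', w'⟩
      · have hfA : f ∈ A := by
          have hfr : f :: r = A := by simpa using hw2
          rw [← hfr]; simp
        rcases hInA hfA with ⟨e', he', hst⟩ | hg | hall
        · refine Or.inr (Or.inl ⟨e', ?_, hst⟩)
          have hleq : l = qa' ++ qb := by simpa using hw1.symm
          rw [hleq]
          exact he'
        · exact Or.inl hg
        · exact Or.inr (Or.inr hall)
      · have hff : f' = f ∧ r = w' ++ A := by
          have := hw2
          rw [List.cons_append] at this
          exact ⟨(List.cons.injEq .. ▸ this).1.symm, (List.cons.injEq .. ▸ this).2⟩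
        obtain ⟨rfl, _⟩ := hff
        have hdecold : ((y, x, lv, (t : Int)) :: qa') ++ qb =
            ((y, x, lv, (t : Int)) :: l) ++ f' :: w' := by
          simp only [List.cons_append, List.cons.injEq, true_and]
          exact hw1
        rcases hInv.dup ((y, x, lv, (t : Int)) :: l) f' w' hdecold hLf with
          hg | ⟨e', he', hst⟩ | hall
        · exact Or.inl hg
        · rcases List.mem_cons.mp he' with rfl | he'
          · refine Or.inr (Or.inr ?_)
            intro σ' hs'
            have hsteq : pvStq (y, x, lv, (t : Int)) = (y, x, lv) := rfl
            rw [← hst, hsteq] at hs'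
            exact hclose σ' hs'
          · exact Or.inr (Or.inl ⟨e', he', hst⟩)
        · exact Or.inr (Or.inr (fun σ' hs' => (hmk σ').mpr (Or.inl (hall σ' hs'))))

-- popping a duplicate lever entry (all of whose successors are already marked) is a no-op
theorem pvAInv_noop {g : List (List Char)} {n m : Int} {y x lv : Int}
    {qa' qb : List (Int × Int × Int × Int)} {v : List (List (List Bool))} {t : Nat}
    (hInv : pvAInv g n m ((y, x, lv, (t : Int)) :: qa') qb v t)
    (hL : pvAt g y x = 'L')
    (hall : ∀ σ', pvStep g n m (y, x, lv) σ' → pvMarked v σ') :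
    pvAInv g n m qa' qb v t ∧ pvAppends g n m v y x lv (t : Int) = [] := by
  obtain ⟨hw1, hw2, hw3, hw4, hw5, hw6, hw7⟩ :=
    hInv.wf (y, x, lv, (t : Int)) (by simp)
  simp only at hw1 hw2 hw3 hw4 hw5 hw6 hw7
  have hlv1 : lv = 1 := hw7 hL
  have hAnil : pvAppends g n m v y x lv (t : Int) = [] := by
    rw [pvAppends_eq_filterMap]
    apply List.filterMap_eq_nil_iff.mpr
    intro d hd
    rcases hF : pvAppF g n m v y x lv (t : Int) d with _ | a
    · rfl
    · exfalso
      obtain ⟨ha, hb1, hb2, hb3, hb4, hb5, hb6⟩ := pvAppF_cell hF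
      set nl : Int := if pvAt g (y + d.1) (x + d.2) = 'L' then 1 else lv with hnl
      have hnl1 : nl = 1 := by rw [hnl]; split <;> omega
      have hstep : pvStep g n m (y, x, lv) (y + d.1, x + d.2, nl) := by
        refine ⟨by simpa using pvDirs_nbrs hd, hb1, hb2, hb3, hb4, hb6, by simp [hnl]⟩
      have hmkd := hall _ hstep
      rw [pvMarked] at hmkd
      simp only at hmkd
      rw [hnl1] at hmkd
      rw [hlv1] at hb5
      rw [hmkd.2.2.2] at hb5
      exact Bool.noConfusion hb5
  refine ⟨⟨hInv.shape, ?_, ?_, hInv.tb, ?_, hInv.rb, ?_, hInv.ml, hInv.mr, hInv.nl0,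
    ?_, hInv.pb, ?_, ?_, ?_⟩, hAnil⟩
  · intro e he
    apply hInv.wf e
    rcases List.mem_append.mp he with h | h
    · exact List.mem_append_left _ (List.mem_cons_of_mem _ h)
    · exact List.mem_append_right _ h
  · intro e he; exact hInv.ta e (by simp [he])
  · intro e he; exact hInv.ra e (by simp [he])
  · intro e he
    exact hInv.gen e (by
      rcases List.mem_append.mp he with h | h
      · simp [h]
      · simp [h])
  · -- fr
    intro σ hunm hd
    obtain ⟨e, he, hde, hse⟩ := hInv.fr σ hunm hd
    rcases List.mem_cons.mp he with rfl | he
    · exact absurd (hall σ hse) hunm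
    · exact ⟨e, he, hde, hse⟩
  · -- eqq
    intro c hc hm
    obtain ⟨e, he, hst⟩ := hInv.eqq c hc hm
    rcases List.mem_append.mp he with he | he
    · rcases List.mem_cons.mp he with rfl | he
      · exfalso
        have hE := (pvEnd_facts hc).2.2.2.2
        rw [pvStq, Prod.ext_iff] at hst
        obtain ⟨e1, hst2⟩ := hst
        rw [Prod.ext_iff] at hst2
        simp only at e1 hst2
        rw [← e1, ← hst2.1] at hE
        rw [hL] at hE
        exact absurd hE (by decide)
      · exact ⟨e, List.mem_append_left _ he, hst⟩
    · exact ⟨e, List.mem_append_right _ he, hst⟩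
  · -- ls
    intro σ hLσ hσ1 hm
    rcases hInv.ls σ hLσ hσ1 hm with ⟨e, he, hst⟩ | hall'
    · rcases List.mem_append.mp he with he | he
      · rcases List.mem_cons.mp he with rfl | he
        · refine Or.inr ?_
          intro σ' hs'
          have hsteq : pvStq (y, x, lv, (t : Int)) = (y, x, lv) := rfl
          rw [← hst, hsteq] at hs'
          exact hall σ' hs'
        · exact Or.inl ⟨e, List.mem_append_left _ he, hst⟩
      · exact Or.inl ⟨e, List.mem_append_right _ he, hst⟩
    · exact Or.inr hall'
  · -- dup
    intro l f r hdec hLf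
    have hdecold : ((y, x, lv, (t : Int)) :: qa') ++ qb =
        ((y, x, lv, (t : Int)) :: l) ++ f :: r := by
      simp only [List.cons_append, List.cons.injEq, true_and]
      exact hdec
    rcases hInv.dup ((y, x, lv, (t : Int)) :: l) f r hdecold hLf with
      hg | ⟨e', he', hst⟩ | hall'
    · exact Or.inl hg
    · rcases List.mem_cons.mp he' with rfl | he'
      · refine Or.inr (Or.inr ?_)
        intro σ' hs'
        have hsteq : pvStq (y, x, lv, (t : Int)) = (y, x, lv) := rfl
        rw [← hst, hsteq] at hs'
        exact hall σ' hs'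
      · exact Or.inr (Or.inl ⟨e', he', hst⟩)
    · exact Or.inr (Or.inr hall')

theorem pvPhi_tail (e : Int × Int × Int × Int) (rest : List (Int × Int × Int × Int))
    (v : List (List (List Bool))) (n m : Int) :
    pvPhi rest v n m < pvPhi (e :: rest) v n m := by
  rw [pvPhi, pvPhi, List.length_cons, List.countP_cons]
  split <;> omega

theorem pvPhi_pop {g : List (List Char)} {n m : Int} {y x lv tc : Int}
    {v : List (List (List Bool))} (hsh : pvVShape v n m) (hlv : lv = 0 ∨ lv = 1)
    (rest : List (Int × Int × Int × Int)) :
    pvPhi (rest ++ pvAppends g n m v y x lv tc)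
      (pvDoMarks v (pvAppends g n m v y x lv tc)) n m <
    pvPhi ((y, x, lv, tc) :: rest) v n m := by
  set A := pvAppends g n m v y x lv tc with hA
  have hAf : ∀ a ∈ A, 0 ≤ a.1 ∧ a.1 < n ∧ 0 ≤ a.2.1 ∧ a.2.1 < m ∧
      (a.2.2.1 = 0 ∨ a.2.2.1 = 1) ∧ (a.2.2.1 = lv ∨ (a.2.2.1 = 1 ∧ lv = 0)) ∧
      pvVGet v a.1 a.2.1 lv = false := by
    intro a ha
    obtain ⟨f1, f2, f3, f4, _, f6, _, f8, _⟩ := pvAppends_mem_facts ha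
    refine ⟨f1, f2, f3, f4, ?_, ?_, f8⟩
    · rw [f6]; split
      · exact Or.inr rfl
      · exact hlv
    · rw [f6]; split
      · rcases hlv with rfl | rfl
        · exact Or.inr ⟨rfl, rfl⟩
        · exact Or.inl rfl
      · exact Or.inl rfl
  have hbound := pvU_marks_bound hlv A v hsh hAf (pvAppends_pairwise g n m v y x lv tc)
  have hlen : A.length ≤ 4 := pvAppends_length_le g n m v y x lv tc
  have hcle : A.countP (fun a => a.2.2.1 == 0) ≤ A.length := List.countP_le_length
  rw [pvPhi, pvPhi, List.length_append, List.length_cons, List.countP_append,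
    List.countP_cons]
  rcases hlv with rfl | rfl
  · rw [if_pos rfl] at hbound
    have hhead : (((y, x, (0 : Int), tc) : Int × Int × Int × Int).2.2.1 == (0 : Int)) = true := by
      simp
    rw [hhead]
    simp only [if_true]
    omega
  · rw [if_neg (by norm_num)] at hbound
    have hc0 : A.countP (fun a => a.2.2.1 == 0) = 0 := by
      apply List.countP_eq_zero.mpr
      intro a ha
      have := (hAf a ha).2.2.2.2.2.1
      simp only [beq_iff_eq]
      rcases this with h | ⟨h, hcontra⟩
      · omega
      · omega
    have hhead : (((y, x, (1 : Int), tc) : Int × Int × Int × Int).2.2.1 == (0 : Int)) = false := by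
      simp
    rw [hhead, hc0]
    simp only [Bool.false_eq_true, if_false]
    omega

theorem pvStep_case {g : List (List Char)} {n m endy endx : Int}
    (hend : pvEndOK g n m endy endx) (fuel : Nat) (y x lv tc : Int)
    (qa' qb : List (Int × Int × Int × Int)) (v : List (List (List Bool))) (t : Nat)
    (hInv : pvAInv g n m ((y, x, lv, tc) :: qa') qb v t)
    (hphi : pvPhi (((y, x, lv, tc) :: qa') ++ qb) v n m < fuel + 1)
    (ih : ∀ qa2 qb2 v2 (t2 : Nat), pvAInv g n m qa2 qb2 v2 t2 →
      pvPhi (qa2 ++ qb2) v2 n m < fuel →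
      pvAnsSpec g n m (pvLoopA g n m endy endx fuel (qa2 ++ qb2) v2)) :
    pvAnsSpec g n m (pvLoopA g n m endy endx (fuel + 1) (((y, x, lv, tc) :: qa') ++ qb) v) := by
  classical
  have htc : tc = (t : Int) := hInv.ta (y, x, lv, tc) (by simp)
  subst htc
  obtain ⟨hw1, hw2, hw3, hw4, hw5, hw6, hw7⟩ :=
    hInv.wf (y, x, lv, (t : Int)) (by simp)
  simp only at hw1 hw2 hw3 hw4 hw5 hw6 hw7
  rw [List.cons_append] at hphi
  rw [List.cons_append, pvLoopA]
  by_cases hret : (y, x) = (endy, endx) ∧ lv ≠ 0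
  · rw [if_pos hret]
    rcases hend with hsome | ⟨hnone, hey, hex⟩
    · obtain ⟨he1, he2, he3, he4, hE⟩ := pvEnd_facts hsome
      rw [Prod.ext_iff] at hret
      obtain ⟨⟨hy, hx⟩, hlvne⟩ := hret
      simp only at hy hx he1 he2 he3 he4 hE
      have hEyx : pvAt g y x = 'E' := by rw [hy, hx]; exact hE
      have hlv1 : lv = 1 := by rcases hw5 with rfl | rfl <;> omega
      rcases hInv.gen (y, x, lv, (t : Int)) (by simp) with hL | ⟨dn, hdn, hdist⟩
      · rw [hEyx] at hL
        exact absurd hL (by decide)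
      · simp only at hdn
        have hdnt : dn = t := by exact_mod_cast hdn
        subst hdnt
        constructor
        · intro hno
          rw [hno] at hsome
          simp at hsome
        · intro c hc
          rw [hsome] at hc
          have hc' : c = (endy, endx) := by injection hc with hc; exact hc.symm
          subst hc'
          have hstate : ((endy, endx).1, (endy, endx).2, (1 : Int)) = (y, x, lv) := by
            simp only [Prod.ext_iff]
            exact ⟨hy.symm, hx.symm, hlv1.symm⟩
          constructor
          · intro d hd
            rw [hstate] at hd
            have := pvDistEq_unique hd (by exact hdist)
            exact_mod_cast congrArg (Nat.cast : Nat → Int) this.symm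
          · intro hnone
            exfalso
            rw [hstate] at hnone
            exact hnone ⟨dn, hdist.1⟩
    · exfalso
      rw [Prod.ext_iff] at hret
      obtain ⟨⟨hy, _⟩, _⟩ := hret
      simp only at hy
      omega
  · rw [if_neg hret]
    simp only
    have hfold := pvFoldl_expand g n m y x lv (t : Int) hw5 pvDirs (qa' ++ qb) v
      hInv.shape (by decide)
    rw [hfold]
    simp only
    rw [← pvAppends_eq_filterMap]
    have hgenor : pvDistEq g n m (y, x, lv) t ∨
        (pvAt g y x = 'L' ∧ ∀ σ', pvStep g n m (y, x, lv) σ' → pvMarked v σ') := by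
      by_cases hLh : pvAt g y x = 'L'
      · rcases hInv.dup [] (y, x, lv, (t : Int)) (qa' ++ qb) (by simp) hLh with
          ⟨dn, hdn, hdist⟩ | ⟨e', he', _⟩ | hall
        · simp only at hdn
          have hdnt : dn = t := by exact_mod_cast hdn
          subst hdnt
          exact Or.inl hdist
        · simp at he'
        · exact Or.inr ⟨hLh, hall⟩
      · rcases hInv.gen (y, x, lv, (t : Int)) (by simp) with hL | ⟨dn, hdn, hdist⟩
        · exact absurd hL hLh
        · simp only at hdn
          have hdnt : dn = t := by exact_mod_cast hdn
          subst hdnt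
          exact Or.inl hdist
    rcases hgenor with hgen | ⟨hLh, hall⟩
    · have hnoret : ∀ c : Int × Int, pvEnd g n m = some c → ¬((y, x) = c ∧ lv = 1) := by
        intro c hc ⟨h1, h2⟩
        rcases hend with hsome | ⟨hnone, _, _⟩
        · rw [hsome] at hc
          have : c = (endy, endx) := by injection hc with hc; exact hc.symm
          subst this
          exact hret ⟨h1, by omega⟩
        · rw [hnone] at hc
          simp at hc
      have hInv' := pvAInv_pop hInv hgen hnoret
      have hphi' := pvPhi_pop (g := g) (y := y) (x := x) (tc := (t : Int)) hInv.shape hw5 (qa' ++ qb)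
      have hres := ih qa' (qb ++ pvAppends g n m v y x lv (t : Int))
        (pvDoMarks v (pvAppends g n m v y x lv (t : Int))) t hInv'
        (by rw [← List.append_assoc]; omega)
      rw [← List.append_assoc] at hres
      exact hres
    · obtain ⟨hInv', hAnil⟩ := pvAInv_noop hInv hLh hall
      rw [hAnil, List.append_nil]
      have : pvDoMarks v [] = v := rfl
      rw [this]
      apply ih qa' qb v t hInv'
      have := pvPhi_tail (y, x, lv, (t : Int)) (qa' ++ qb) v n m
      omega

theorem pvLoopA_correct {g : List (List Char)} {n m endy endx : Int}
    (hend : pvEndOK g n m endy endx) :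
    ∀ (fuel : Nat) (qa qb : List (Int × Int × Int × Int)) (v : List (List (List Bool)))
      (t : Nat), pvAInv g n m qa qb v t → pvPhi (qa ++ qb) v n m < fuel →
      pvAnsSpec g n m (pvLoopA g n m endy endx fuel (qa ++ qb) v) := by
  intro fuel
  induction fuel with
  | zero => intro qa qb v t _ hphi; exact absurd hphi (Nat.not_lt_zero _)
  | succ fuel ih =>
    intro qa qb v t hInv hphi
    cases qa with
    | nil =>
      cases qb with
      | nil =>
        rw [List.nil_append, pvLoopA]
        exact pvEmpty_case hInv
      | cons e qb' =>
        have hshift := pvAInv_shift hInv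
        obtain ⟨y, x, lv, tc⟩ := e
        have h1 : ([] : List (Int × Int × Int × Int)) ++ (y, x, lv, tc) :: qb' =
            ((y, x, lv, tc) :: qb') ++ [] := by simp
        rw [h1]
        apply pvStep_case hend fuel y x lv tc qb' [] v (t + 1) hshift
        · rw [← h1]; exact hphi
        · exact ih
    | cons e qa' =>
      obtain ⟨y, x, lv, tc⟩ := e
      exact pvStep_case hend fuel y x lv tc qa' qb v t hInv hphi ih

theorem foldl_lastD {α : Type} (L : List α) (p : α → Bool) (e0 : α) :
    L.foldl (fun q c => if p c then c else q) e0 = ((L.filter p).getLast?).getD e0 := by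
  induction L using List.reverseRecOn with
  | nil => simp
  | append_singleton xs x ih =>
    simp only [List.foldl_append, List.filter_append, ih, List.foldl_cons, List.foldl_nil]
    by_cases h : p x <;> simp [h, List.getLast?_append]

theorem pvVGet_replicate (nn mm : Nat) (y x l : Int) :
    pvVGet (List.replicate nn (List.replicate mm [false, false])) y x l = false := by
  rw [pvVGet]
  by_cases hy : y.toNat < nn
  · have hrow : (List.replicate nn (List.replicate mm [false, false])).getD y.toNat ([] : List (List Bool)) =
        List.replicate mm [false, false] := by
      rw [List.getD_eq_getElem?_getD, List.getElem?_replicate, if_pos hy]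
      rfl
    rw [hrow]
    by_cases hx : x.toNat < mm
    · have hcell : (List.replicate mm [false, false]).getD x.toNat ([] : List Bool) =
          [false, false] := by
        rw [List.getD_eq_getElem?_getD, List.getElem?_replicate, if_pos hx]
        rfl
      rw [hcell]
      rcases l.toNat with _ | k
      · rfl
      · rcases k with _ | k
        · rfl
        · simp [List.getD_eq_getElem?_getD]
    · have hcell : (List.replicate mm [false, false]).getD x.toNat ([] : List Bool) = [] := by
        rw [List.getD_eq_getElem?_getD, List.getElem?_replicate, if_neg hx]
        rfl
      rw [hcell]
      simp [List.getD_eq_getElem?_getD]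
  · have hrow : (List.replicate nn (List.replicate mm [false, false])).getD y.toNat ([] : List (List Bool)) = [] := by
      rw [List.getD_eq_getElem?_getD, List.getElem?_replicate, if_neg hy]
      rfl
    rw [hrow]
    simp [List.getD_eq_getElem?_getD]

theorem pvMarked_replicate (nn mm : Nat) (σ : Int × Int × Int) :
    ¬ pvMarked (List.replicate nn (List.replicate mm [false, false])) σ := by
  rintro ⟨_, _, _, hget⟩
  rw [pvVGet_replicate] at hget
  exact Bool.noConfusion hget

theorem pvScanA_eq (g : List (List Char)) (n m : Int) :
    pvScanA g n m (List.replicate n.toNat (List.replicate m.toNat [false, false])) =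
      ((pvSrcCells g n m).map (fun c => (c.1, c.2, 0, 0)),
       pvDoMarks (List.replicate n.toNat (List.replicate m.toNat [false, false]))
         ((pvSrcCells g n m).map (fun c => (c.1, c.2, 0, 0))),
       ((((pvCells n m).filter (fun c => pvAt g c.1 c.2 = 'E')).getLast?).getD (-1, -1)).1,
       ((((pvCells n m).filter (fun c => pvAt g c.1 c.2 = 'E')).getLast?).getD (-1, -1)).2) := by
  set v0 := List.replicate n.toNat (List.replicate m.toNat [false, false]) with hv0
  have h0 := foldl_pvCells n m
    (fun (s : List (Int × Int × Int × Int) × List (List (List Bool)) × Int × Int)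
        (c : Int × Int) =>
      if pvAt g c.1 c.2 = 'S' then
        (s.1 ++ [(c.1, c.2, 0, 0)], pvVSet s.2.1 c.1 c.2 0, s.2.2.1, s.2.2.2)
      else if pvAt g c.1 c.2 = 'E' then (s.1, s.2.1, c.1, c.2)
      else s) ([], v0, -1, -1)
  have hcongr : (pvCells n m).foldl
      (fun (s : List (Int × Int × Int × Int) × List (List (List Bool)) × Int × Int)
          (c : Int × Int) =>
        if pvAt g c.1 c.2 = 'S' then
          (s.1 ++ [(c.1, c.2, 0, 0)], pvVSet s.2.1 c.1 c.2 0, s.2.2.1, s.2.2.2)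
        else if pvAt g c.1 c.2 = 'E' then (s.1, s.2.1, c.1, c.2)
        else s) ([], v0, -1, -1) =
      (pvCells n m).foldl
      (fun (s : List (Int × Int × Int × Int) × List (List (List Bool)) × Int × Int)
          (c : Int × Int) =>
        ((fun q (c : Int × Int) => if pvAt g c.1 c.2 = 'S' then q ++ [(c.1, c.2, 0, 0)] else q) s.1 c,
         (fun (w : List (List (List Bool)) × Int × Int) (c : Int × Int) =>
           ((fun vv (c : Int × Int) => if pvAt g c.1 c.2 = 'S' then pvVSet vv c.1 c.2 0 else vv) w.1 c,
            (fun (p : Int × Int) (c : Int × Int) => if pvAt g c.1 c.2 = 'E' then (c.1, c.2) else p) w.2 c)) s.2 c))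
      ([], v0, -1, -1) := by
    apply PySem.List.foldl_congr_mem
    intro s c _
    by_cases hS : pvAt g c.1 c.2 = 'S'
    · simp [hS]
    · by_cases hE : pvAt g c.1 c.2 = 'E' <;> simp [hS, hE]
  rw [pvScanA]
  refine (h0.trans hcongr).trans ?_
  rw [PySem.List.foldl_prod_mk
    (f := fun q (c : Int × Int) => if pvAt g c.1 c.2 = 'S' then q ++ [(c.1, c.2, 0, 0)] else q)
    (g := fun (w : List (List (List Bool)) × Int × Int) (c : Int × Int) =>
      ((fun vv (c : Int × Int) => if pvAt g c.1 c.2 = 'S' then pvVSet vv c.1 c.2 0 else vv) w.1 c,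
       (fun (p : Int × Int) (c : Int × Int) => if pvAt g c.1 c.2 = 'E' then (c.1, c.2) else p) w.2 c))]
  rw [PySem.List.foldl_prod_mk
    (f := fun vv (c : Int × Int) => if pvAt g c.1 c.2 = 'S' then pvVSet vv c.1 c.2 0 else vv)
    (g := fun (p : Int × Int) (c : Int × Int) => if pvAt g c.1 c.2 = 'E' then (c.1, c.2) else p)]
  simp only [Prod.mk.injEq]
  refine ⟨?_, ?_, ?_⟩
  · rw [PySem.List.foldl_append_ite]
    simp [pvSrcCells]
  · rw [PySem.List.foldl_ite_eq_foldl_filter]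
    rw [pvDoMarks, List.foldl_map]
    rfl
  · have h := foldl_lastD (pvCells n m) (fun c => decide (pvAt g c.1 c.2 = 'E'))
      ((-1, -1) : Int × Int)
    have hpair : (pvCells n m).foldl
        (fun (p : Int × Int) (c : Int × Int) =>
          if pvAt g c.1 c.2 = 'E' then (c.1, c.2) else p) (-1, -1) =
        (pvCells n m).foldl (fun (p : Int × Int) (c : Int × Int) =>
          if decide (pvAt g c.1 c.2 = 'E') then c else p) (-1, -1) := by
      apply PySem.List.foldl_congr_mem
      intro p c _
      by_cases hE : pvAt g c.1 c.2 = 'E' <;> simp [hE]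
    rw [hpair, h]

-- the initial state after the scan satisfies the invariant at level 0
theorem pvAInv_init (g : List (List Char)) (n m : Int) :
    pvAInv g n m ((pvSrcCells g n m).map (fun c => (c.1, c.2, 0, 0))) []
      (pvDoMarks (List.replicate n.toNat (List.replicate m.toNat [false, false]))
        ((pvSrcCells g n m).map (fun c => (c.1, c.2, 0, 0)))) 0 := by
  classical
  set v0 := List.replicate n.toNat (List.replicate m.toNat [false, false]) with hv0
  set q0 := (pvSrcCells g n m).map (fun c => ((c.1, c.2, 0, 0) : Int × Int × Int × Int))
    with hq0
  have hq0in : ∀ a ∈ q0, 0 ≤ a.1 ∧ a.1 < n ∧ 0 ≤ a.2.1 ∧ a.2.1 < m ∧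
      (a.2.2.1 = 0 ∨ a.2.2.1 = 1) := by
    rintro a ha
    obtain ⟨c, hc, rfl⟩ := List.mem_map.mp ha
    obtain ⟨h1, h2, h3, h4, _⟩ := mem_pvSrcCells.mp hc
    exact ⟨h1, h2, h3, h4, Or.inl rfl⟩
  have hmk : ∀ σ, pvMarked (pvDoMarks v0 q0) σ ↔ ∃ a ∈ q0, pvStq a = σ := by
    intro σ
    rw [pvMarked_doMarks q0 (pvVShape_replicate n m) hq0in σ]
    constructor
    · rintro (hm | h)
      · exact absurd hm (pvMarked_replicate _ _ σ)
      · exact h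
    · exact Or.inr
  have hsrc_iff : ∀ σ, pvSrc g n m σ ↔ ∃ a ∈ q0, pvStq a = σ := by
    intro σ
    constructor
    · rintro ⟨h1, h2, h3, h4, h5, h6⟩
      refine ⟨(σ.1, σ.2.1, 0, 0), List.mem_map.mpr ⟨(σ.1, σ.2.1),
        mem_pvSrcCells.mpr ⟨h1, h2, h3, h4, h5⟩, rfl⟩, ?_⟩
      rw [pvStq]
      exact Prod.ext rfl (Prod.ext rfl h6.symm)
    · rintro ⟨a, ha, rfl⟩
      obtain ⟨c, hc, rfl⟩ := List.mem_map.mp ha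
      obtain ⟨h1, h2, h3, h4, h5⟩ := mem_pvSrcCells.mp hc
      exact ⟨h1, h2, h3, h4, h5, rfl⟩
  have hsrcS : ∀ a ∈ q0, pvAt g a.1 a.2.1 = 'S' ∧ a.2.2.1 = 0 ∧ a.2.2.2 = 0 := by
    rintro a ha
    obtain ⟨c, hc, rfl⟩ := List.mem_map.mp ha
    exact ⟨(mem_pvSrcCells.mp hc).2.2.2.2, rfl, rfl⟩
  refine ⟨pvVShape_doMarks q0 (pvVShape_replicate n m) hq0in, ?_, ?_, ?_, ?_, ?_, ?_,
    ?_, ?_, ?_, ?_, ?_, ?_, ?_, ?_⟩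
  · intro e he
    rw [List.append_nil] at he
    obtain ⟨h1, h2, h3, h4, h5⟩ := hq0in e he
    obtain ⟨hS, _, _⟩ := hsrcS e he
    exact ⟨h1, h2, h3, h4, h5, by rw [hS]; decide, by rw [hS]; intro hh; exact absurd hh (by decide)⟩
  · intro e he
    rw [(hsrcS e he).2.2]
    norm_num
  · intro e he; simp at he
  · intro e he
    apply (hsrc_iff (pvStq e)).mpr ⟨e, he, rfl⟩
  · intro e he; simp at he
  · intro e he
    rw [List.append_nil] at he
    refine Or.inr ⟨0, by rw [(hsrcS e he).2.2]; norm_num, ?_, fun k _ => Nat.zero_le k⟩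
    exact (hsrc_iff (pvStq e)).mpr ⟨e, he, rfl⟩
  · intro σ hr
    exact (hmk σ).mpr ((hsrc_iff σ).mp hr)
  · intro σ hm
    exact pvReach_mono g n m (Nat.zero_le 1) ((hsrc_iff σ).mpr ((hmk σ).mp hm))
  · intro c hLc hm
    obtain ⟨h1, h2, h3, h4, h5, _⟩ := (hsrc_iff _).mpr ((hmk _).mp hm)
    simp only at h5
    rw [h5] at hLc
    exact absurd hLc (by decide)
  · intro σ hunm hd
    obtain ⟨ρ, hρ, hs⟩ := pvDistEq_pred hd
    have hρ0 : pvSrc g n m ρ := by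
      have := hρ.1
      exact this
    obtain ⟨a, ha, hst⟩ := (hsrc_iff ρ).mp hρ0
    exact ⟨a, ha, by rw [hst]; exact hρ, by rw [hst]; exact hs⟩
  · intro σ hm hd
    exfalso
    have hσ0 : pvDistEq g n m σ 0 :=
      ⟨(hsrc_iff σ).mpr ((hmk σ).mp hm), fun k _ => Nat.zero_le k⟩
    have := pvDistEq_unique hσ0 hd
    omega
  · intro c hc hm
    exfalso
    obtain ⟨_, _, _, _, _, h6⟩ := (hsrc_iff _).mpr ((hmk _).mp hm)
    simp only at h6
    exact absurd h6 (by norm_num)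
  · intro σ hLσ hσ1 hm
    exfalso
    obtain ⟨_, _, _, _, h5, _⟩ := (hsrc_iff σ).mpr ((hmk σ).mp hm)
    rw [h5] at hLσ
    exact absurd hLσ (by decide)
  · intro l f r hdec hLf
    exfalso
    have hf : f ∈ q0 := by
      rw [List.append_nil] at hdec
      rw [hdec]
      simp
    rw [(hsrcS f hf).1] at hLf
    exact absurd hLf (by decide)

-- ===== A-side: the queue BFS satisfies pvAnsSpec =====
theorem solutionA_ans (maps : List String) :
    pvAnsSpec (maps.map String.toList) maps.length (maps.headD "").length (solution maps) := by
  classical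
  set g := maps.map String.toList with hg
  set n : Int := (maps.length : Int) with hn
  set m : Int := ((maps.headD "").length : Int) with hm
  rw [solution]
  simp only [← hg, ← hn, ← hm]
  rw [pvScanA_eq g n m]
  simp only
  set ep := (((pvCells n m).filter (fun c => pvAt g c.1 c.2 = 'E')).getLast?).getD (-1, -1)
    with hep
  have hend : pvEndOK g n m ep.1 ep.2 := by
    rw [pvEndOK, pvEnd]
    rcases hE : ((pvCells n m).filter (fun c => pvAt g c.1 c.2 = 'E')).getLast? with _ | c
    · right
      refine ⟨hE, ?_, ?_⟩ <;> rw [hep, hE] <;> rfl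
    · left
      rw [hep, hE]
      rfl
  have hq0len : ((pvSrcCells g n m).map
      (fun c => ((c.1, c.2, 0, 0) : Int × Int × Int × Int))).length ≤ n.toNat * m.toNat := by
    rw [List.length_map, pvSrcCells, ← length_pvCells n m]
    exact List.length_filter_le _ _
  have hphi : pvPhi ((pvSrcCells g n m).map (fun c => (c.1, c.2, 0, 0)))
      (pvDoMarks (List.replicate n.toNat (List.replicate m.toNat [false, false]))
        ((pvSrcCells g n m).map (fun c => (c.1, c.2, 0, 0)))) n m <
      13 * (n.toNat * m.toNat) + 13 := by
    rw [pvPhi]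
    have h1 := pvU_le (pvDoMarks (List.replicate n.toNat (List.replicate m.toNat [false, false]))
      ((pvSrcCells g n m).map (fun c => (c.1, c.2, 0, 0)))) n m 0
    have h2 := pvU_le (pvDoMarks (List.replicate n.toNat (List.replicate m.toNat [false, false]))
      ((pvSrcCells g n m).map (fun c => (c.1, c.2, 0, 0)))) n m 1
    have h3 : ((pvSrcCells g n m).map
        (fun c => ((c.1, c.2, 0, 0) : Int × Int × Int × Int))).countP
        (fun e => e.2.2.1 == 0) ≤ ((pvSrcCells g n m).map
        (fun c => ((c.1, c.2, 0, 0) : Int × Int × Int × Int))).length :=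
      List.countP_le_length
    omega
  have hres := pvLoopA_correct hend (13 * (n.toNat * m.toNat) + 13)
    ((pvSrcCells g n m).map (fun c => (c.1, c.2, 0, 0))) []
    (pvDoMarks (List.replicate n.toNat (List.replicate m.toNat [false, false]))
      ((pvSrcCells g n m).map (fun c => (c.1, c.2, 0, 0)))) 0
    (pvAInv_init g n m) (by rw [List.append_nil]; exact hphi)
  rw [List.append_nil] at hres
  exact hres

-- ===== B-side: the relaxation satisfies pvAnsSpec =====
theorem solutionB_ans (maps : List String) :
    pvAnsSpec (maps.map String.toList) maps.length (maps.headD "").length (solution_alt maps) := by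
  classical
  set g := maps.map String.toList with hg
  set n : Int := (maps.length : Int) with hn
  set m : Int := ((maps.headD "").length : Int) with hm
  have hdp0 : pvDpInv g n m 0 (pvScanB g n m).1 := by
    refine ⟨pvScanB_keys_nodup g n m, ?_⟩
    intro σ d
    rw [pvScanB_dict_get?]
    constructor
    · rintro ⟨hsrc, rfl⟩
      refine ⟨0, by norm_num, ⟨hsrc, fun k _ => Nat.zero_le k⟩, hsrc⟩
    · rintro ⟨dn, rfl, hdist, hreach⟩
      have : dn = 0 := Nat.le_zero.mp (hdist.2 0 hreach)
      subst this
      exact ⟨hreach, by norm_num⟩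
  have hgood : pvGood g n m (pvRounds g n m (2 * (n.toNat * m.toNat)) (pvScanB g n m).1) :=
    pvRounds_good g n m (2 * (n.toNat * m.toNat)) 0 _ hdp0 (by omega)
  rw [solution_alt]
  simp only [← hg, ← hn, ← hm, pvScanB_end]
  set dp := pvRounds g n m (2 * (n.toNat * m.toNat)) (pvScanB g n m).1 with hdp
  constructor
  · intro hend
    rw [hend]
  · intro e hend
    rw [hend]
    simp only
    constructor
    · intro d hd
      have := (hgood (e.1, e.2, 1) (d : Int)).mpr ⟨d, rfl, hd⟩
      rw [PySem.Dict.getD_eq_get?_getD, this]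
      rfl
    · intro hnone
      rcases hlook : dp.get? (e.1, e.2, 1) with _ | d
      · rw [PySem.Dict.getD_eq_get?_getD, hlook]
        rfl
      · obtain ⟨dn, _, hdist⟩ := (hgood (e.1, e.2, 1) d).mp hlook
        exact absurd ⟨dn, hdist.1⟩ hnone

-- ===== VERDICT (by name: the statement is the Claim_ definition above) =====
theorem solution_spec : Claim_equal_solution := by
  intro maps _ _
  exact pvAnsSpec_unique (solutionA_ans maps) (solutionB_ans maps)
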